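-- pv_equiv track=rewrite | github.com/Lounes78/matcha-tts | utils/process_text.py | expand_abbreviations
-- ===== SOURCE A (Python) =====
-- def expand_abbreviations(text):
--     """Expand common abbreviations"""
--     abbreviations = {
--         'mr.': 'mister',
--         'mrs.': 'misess',
--         'dr.': 'doctor',
--         'st.': 'saint',
--         'co.': 'company',
--         'jr.': 'junior',
--         'sr.': 'senior',
--         'etc.': 'et cetera',
--         'vs.': 'versus',
--         'ltd.': 'limited',
--     }
--
--     for abbr, expansion in abbreviations.items():
--         text = text.replace(abbr, expansion)
--
--     return text
-- ===== SOURCE B (Python) =====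
-- _ABBREVIATIONS = [
--     ('mr.', 'mister'),
--     ('mrs.', 'misess'),
--     ('dr.', 'doctor'),
--     ('st.', 'saint'),
--     ('co.', 'company'),
--     ('jr.', 'junior'),
--     ('sr.', 'senior'),
--     ('etc.', 'et cetera'),
--     ('vs.', 'versus'),
--     ('ltd.', 'limited'),
-- ]
--
--
-- def expand_abbreviations(text):
--     """Expand common abbreviations in one left-to-right scan of the original text."""
--     out = []
--     i = 0
--     n = len(text)
--     while i < n:
--         for abbr, expansion in _ABBREVIATIONS:
--             if text.startswith(abbr, i):
--                 out.append(expansion)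
--                 i += len(abbr)
--                 break
--         else:
--             out.append(text[i])
--             i += 1
--     return ''.join(out)
-- ===== Notes on version B (the rewrite author's own statement) =====
-- stated objective: alternative
-- what changed: A makes ten sequential full-text replace passes (one per abbreviation, each rescanning the whole, already partially rewritten text); B makes a single left-to-right scan that emits each expansion at the position where its abbreviation occurs in the ORIGINAL text, so the output is assembled in one pass and expansions are never rescanned.
-- intended difference: On texts containing 'mrs.t.' or 'mrs.r.', A's second pass rewrites 'mrs.' to 'misess' whose trailing 's' joins the following 't.'/'r.' to manufacture a new 'st.'/'sr.' that a later pass also expands (A('mrs.t.') = 'misessaint'); B expands only the abbreviations present in the input (B('mrs.t.') = 'misesst.'), which is the intended behaviour of an abbreviation expander. — e.g. on expand_abbreviations("mrs.t."): A returns "misessaint", B returns "misesst."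
import Mathlib
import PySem

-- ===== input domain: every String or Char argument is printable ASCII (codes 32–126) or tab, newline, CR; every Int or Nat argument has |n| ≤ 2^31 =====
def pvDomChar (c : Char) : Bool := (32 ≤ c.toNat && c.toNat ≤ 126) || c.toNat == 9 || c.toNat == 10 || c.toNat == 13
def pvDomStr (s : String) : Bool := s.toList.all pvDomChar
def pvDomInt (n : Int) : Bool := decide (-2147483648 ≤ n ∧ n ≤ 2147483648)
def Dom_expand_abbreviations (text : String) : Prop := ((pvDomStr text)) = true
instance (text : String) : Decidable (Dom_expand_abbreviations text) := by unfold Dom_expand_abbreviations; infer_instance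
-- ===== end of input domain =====

-- B replaces A's ten sequential full-text replace passes by one left-to-right scan
-- that expands each abbreviation where it occurs in the original text (alternative
-- decomposition, same cost); on texts containing "mrs.t."/"mrs.r." (D_ below) A's
-- cascading passes expand an abbreviation manufactured by an earlier replacement
-- while B expands only abbreviations present in the input.


-- ===== PORT A =====
-- A builds the abbreviation dict and applies text.replace for each item in order.
def expand_abbreviations (text : String) : String :=
  let abbreviations : PySem.Dict String String :=
    PySem.Dict.mk [("mr.", "mister"), ("mrs.", "misess"), ("dr.", "doctor"),
      ("st.", "saint"), ("co.", "company"), ("jr.", "junior"), ("sr.", "senior"),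
      ("etc.", "et cetera"), ("vs.", "versus"), ("ltd.", "limited")]
  abbreviations.items.foldl (fun t p => PySem.Str.replace t p.1 p.2) text

-- ===== PORT B =====
-- the abbreviation table of Source B, as (key, expansion) char lists in dict order
def pvAbbrs : List (List Char × List Char) :=
  [(['m','r','.'], ['m','i','s','t','e','r']),
   (['m','r','s','.'], ['m','i','s','e','s','s']),
   (['d','r','.'], ['d','o','c','t','o','r']),
   (['s','t','.'], ['s','a','i','n','t']),
   (['c','o','.'], ['c','o','m','p','a','n','y']),
   (['j','r','.'], ['j','u','n','i','o','r']),
   (['s','r','.'], ['s','e','n','i','o','r']),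
   (['e','t','c','.'], ['e','t',' ','c','e','t','e','r','a']),
   (['v','s','.'], ['v','e','r','s','u','s']),
   (['l','t','d','.'], ['l','i','m','i','t','e','d'])]

-- the while-loop of Source B (index i bounded by len(text)): at each position try
-- the keys in dict order; on a match emit the expansion and jump past the key
def pvScanGo : Nat → List Char → List Char
  | 0, _ => []
  | _ + 1, [] => []
  | fuel + 1, c :: t =>
    match pvAbbrs.find? (fun p => p.1.isPrefixOf (c :: t)) with
    | some p => p.2 ++ pvScanGo fuel (List.drop p.1.length (c :: t))
    | none => c :: pvScanGo fuel t

def pvScan (l : List Char) : List Char := pvScanGo l.length l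

def expand_abbreviations_alt (text : String) : String := String.ofList (pvScan text.toList)

-- ===== PRECONDITION & SPEC =====
-- On texts containing "mrs.t." or "mrs.r.", A's replacement of "mrs." by "misess"
-- manufactures a new "st."/"sr." (trailing 's' + following "t."/"r.") which a later
-- pass also expands (A "mrs.t." = "misessaint"); B expands only abbreviations present
-- in the input (B "mrs.t." = "misesst."), which is the intended behaviour.
-- cheap closed-form membership test on the input: does the word u occur in l?
def pvHasPat (u : List Char) : List Char → Bool
  | [] => false
  | c :: t => decide (List.take u.length (c :: t) = u) || pvHasPat u t

def D_expand_abbreviations (text : String) : Prop :=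
  (pvHasPat ("mrs.t." : String).toList text.toList
    || pvHasPat ("mrs.r." : String).toList text.toList) = true
instance (text : String) : Decidable (D_expand_abbreviations text) := by
  unfold D_expand_abbreviations; infer_instance

def Spec_expand_abbreviations (text : String) (out : String) : Prop :=
  ¬ D_expand_abbreviations text → out = expand_abbreviations_alt text
instance (text : String) (out : String) : Decidable (Spec_expand_abbreviations text out) := by
  unfold Spec_expand_abbreviations; infer_instance

def pvDiffWitness_expand_abbreviations : String := "mrs.t."
def pvDiffWitnessOut_expand_abbreviations : String × String := ("misessaint", "misesst.")

-- ===== CLAIM (what is proved, stated in full; the proofs are below) =====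
def Claim_unchanged_expand_abbreviations : Prop := ∀ (text : String), Dom_expand_abbreviations text → Spec_expand_abbreviations text (expand_abbreviations text)
def Claim_changed_expand_abbreviations : Prop := Dom_expand_abbreviations (pvDiffWitness_expand_abbreviations) ∧ D_expand_abbreviations (pvDiffWitness_expand_abbreviations) ∧ expand_abbreviations (pvDiffWitness_expand_abbreviations) = pvDiffWitnessOut_expand_abbreviations.1 ∧ expand_abbreviations_alt (pvDiffWitness_expand_abbreviations) = pvDiffWitnessOut_expand_abbreviations.2 ∧ pvDiffWitnessOut_expand_abbreviations.1 ≠ pvDiffWitnessOut_expand_abbreviations.2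
def Claim_exact_expand_abbreviations : Prop := ∀ (text : String), Dom_expand_abbreviations text → D_expand_abbreviations text → expand_abbreviations text ≠ expand_abbreviations_alt text

-- ===== LEMMAS AND PROOFS =====

-- proof-side model of CPython's str.replace for a nonempty pattern
def pvRepl (a b : List Char) : List Char → List Char
  | [] => []
  | c :: t =>
    if h : (a.isPrefixOf (c :: t) && !a.isEmpty) = true then
      b ++ pvRepl a b (List.drop a.length (c :: t))
    else c :: pvRepl a b t
termination_by l => l.length
decreasing_by
  · simp only [Bool.and_eq_true, Bool.not_eq_eq_eq_not, Bool.not_true, List.isEmpty_eq_false_iff] at h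
    have : 0 < a.length := List.length_pos_iff.mpr h.2
    simp only [List.length_drop, List.length_cons]
    omega
  · simp only [List.length_cons]; omega

lemma pvRepl_nil (a b : List Char) : pvRepl a b [] = [] := by rw [pvRepl]

lemma pvRepl_cons_true {a : List Char} (b : List Char) {c : Char} {t : List Char}
    (h : (a.isPrefixOf (c :: t) && !a.isEmpty) = true) :
    pvRepl a b (c :: t) = b ++ pvRepl a b (List.drop a.length (c :: t)) := by
  rw [pvRepl, dif_pos h]

lemma pvRepl_cons_false {a : List Char} (b : List Char) {c : Char} {t : List Char}
    (h : ¬ (a.isPrefixOf (c :: t) && !a.isEmpty) = true) :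
    pvRepl a b (c :: t) = c :: pvRepl a b t := by
  rw [pvRepl, dif_neg h]

lemma pvRepl_cons_neg {a : List Char} (b : List Char) {c : Char} {t : List Char}
    (h : ¬ a <+: (c :: t)) :
    pvRepl a b (c :: t) = c :: pvRepl a b t := by
  rw [pvRepl, dif_neg]
  simp only [Bool.and_eq_true, not_and, List.isPrefixOf_iff_prefix]
  intro hp; exact absurd hp h

lemma pvRepl_match {a : List Char} (b : List Char) (ha : a ≠ []) (v : List Char) :
    pvRepl a b (a ++ v) = b ++ pvRepl a b v := by
  cases a with
  | nil => exact absurd rfl ha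
  | cons x xs =>
    have hcons : (x :: xs) ++ v = x :: (xs ++ v) := rfl
    rw [hcons, pvRepl_cons_true b (by
      simp only [Bool.and_eq_true, List.isPrefixOf_iff_prefix, ← hcons]
      exact ⟨List.prefix_append _ _, by simp⟩)]
    rw [← hcons, List.drop_left]

-- pvRepl is exactly PySem.Chars.replace for a nonempty pattern
lemma pvGo_spec (a b : List Char) (ha : a ≠ []) :
    ∀ fuel l acc, l.length ≤ fuel →
      PySem.Chars.replace.go a b fuel l acc = acc.reverse ++ pvRepl a b l := by
  intro fuel
  induction fuel with
  | zero =>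
    intro l acc h
    have hl : l = [] := List.eq_nil_of_length_eq_zero (Nat.le_zero.mp h)
    subst hl
    rw [PySem.Chars.replace.go.eq_def]
    simp [pvRepl_nil]
  | succ n ih =>
    intro l acc h
    cases l with
    | nil =>
      rw [PySem.Chars.replace.go.eq_def]
      simp [pvRepl_nil]
    | cons c t =>
      rw [PySem.Chars.replace.go.eq_def]
      by_cases hp : a <+: (c :: t)
      · have hp' : a.isPrefixOf (c :: t) = true := List.isPrefixOf_iff_prefix.mpr hp
        simp only [hp', if_true]
        obtain ⟨v, hv⟩ := hp
        have hd : List.drop a.length (c :: t) = v := by rw [← hv, List.drop_left]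
        have hlen : (List.drop a.length (c :: t)).length ≤ n := by
          have h1 : 0 < a.length := List.length_pos_iff.mpr ha
          simp only [List.length_drop, List.length_cons]
          simp only [List.length_cons] at h
          omega
        rw [ih _ _ hlen]
        rw [hd, ← hv, pvRepl_match b ha]
        simp
      · have hp' : ¬ a.isPrefixOf (c :: t) = true := by
          simp only [List.isPrefixOf_iff_prefix]; exact hp
        simp only [hp']
        rw [ih t (c :: acc) (by simpa using Nat.le_of_succ_le_succ h)]
        rw [pvRepl_cons_neg b hp]
        simp
lemma pvReplace_eq {a : List Char} (b : List Char) (ha : a ≠ []) (s : List Char) :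
    PySem.Chars.replace s a b = pvRepl a b s := by
  unfold PySem.Chars.replace
  rw [if_neg (by simpa using ha)]
  simpa using pvGo_spec a b ha s.length s [] le_rfl

-- the sequential passes of A, over char lists
def pvFold (ps : List (List Char × List Char)) (l : List Char) : List Char :=
  ps.foldl (fun s pr => pvRepl pr.1 pr.2 s) l

lemma pvFold_nil (ps : List (List Char × List Char)) : pvFold ps [] = [] := by
  induction ps with
  | nil => rfl
  | cons p ps ih => rw [pvFold, List.foldl_cons, pvRepl_nil]; exact ih

-- prefix facts
lemma pvPrefix_getElem? {p x : List Char} (h : p <+: x) {j : Nat} (hj : j < p.length) :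
    x[j]? = p[j]? := by
  obtain ⟨w, rfl⟩ := h
  exact List.getElem?_append_left hj

lemma pvNotPfx {a k v : List Char} {j : Nat} (hja : j < a.length) (hjk : j < k.length)
    (hne : a[j]? ≠ k[j]?) : ¬ a <+: (k ++ v) := by
  intro h
  have h1 := pvPrefix_getElem? h hja
  rw [List.getElem?_append_left hjk] at h1
  exact hne h1.symm

-- "a can match at no offset inside k, whatever follows k": a char of k disagrees
def pvBlocked (k a : List Char) : Bool :=
  (List.range k.length).all fun m =>
    (List.range (min a.length (k.length - m))).any fun j => a[j]? != k[m + j]?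

lemma pvBlocked_spec {k a : List Char} (hb : pvBlocked k a = true) :
    ∀ m, m < k.length → ∀ v, ¬ a <+: (k.drop m ++ v) := by
  intro m hm v
  have hall := (List.all_eq_true.mp hb) m (List.mem_range.mpr hm)
  obtain ⟨j, hj, hne⟩ := List.any_eq_true.mp hall
  rw [List.mem_range] at hj
  have hja : j < a.length := lt_of_lt_of_le hj (min_le_left _ _)
  have hmj : m + j < k.length := by omega
  have hjk : j < (k.drop m).length := by simp only [List.length_drop]; omega
  apply pvNotPfx hja hjk
  rw [List.getElem?_drop]
  exact bne_iff_ne.mp hne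

-- shift: a pass that cannot match inside k (nor across its end) leaves k alone
lemma pvShiftH {a b : List Char} :
    ∀ (k v : List Char), (∀ m, m < k.length → ¬ a <+: (k.drop m ++ v)) →
      pvRepl a b (k ++ v) = k ++ pvRepl a b v := by
  intro k
  induction k with
  | nil => intro v _; rfl
  | cons c k ih =>
    intro v H
    have h0 : ¬ a <+: (c :: (k ++ v)) := by
      have := H 0 (by simp)
      simpa using this
    have H' : ∀ m, m < k.length → ¬ a <+: (k.drop m ++ v) := by
      intro m hm
      have := H (m + 1) (by simp only [List.length_cons]; omega)
      simpa using this
    have hcons : (c :: k) ++ v = c :: (k ++ v) := rfl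
    rw [hcons, pvRepl_cons_neg b h0, ih v H']
    rfl

lemma pvShiftB {a k : List Char} (b : List Char) (hb : pvBlocked k a = true) (v : List Char) :
    pvRepl a b (k ++ v) = k ++ pvRepl a b v :=
  pvShiftH k v (fun m hm => pvBlocked_spec hb m hm v)

-- prefix stability: a dot-terminated pattern short enough cannot become a prefix
-- through a replacement whose expansion is dot-free
lemma pvStableN {b : List Char} (hb : '.' ∉ b) (a : List Char) :
    ∀ n p q l, p = q ++ ['.'] → '.' ∉ q → p.length ≤ b.length → l.length ≤ n →
      p <+: pvRepl a b l → p <+: l := by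
  intro n
  induction n with
  | zero =>
    intro p q l hp hq hpb hl h
    have : l = [] := List.eq_nil_of_length_eq_zero (Nat.le_zero.mp hl)
    subst this
    rwa [pvRepl_nil] at h
  | succ n ih =>
    intro p q l hp hq hpb hl h
    cases l with
    | nil => rwa [pvRepl_nil] at h
    | cons c t =>
      by_cases hpre : (a.isPrefixOf (c :: t) && !a.isEmpty) = true
      · rw [pvRepl_cons_true b hpre] at h
        exfalso
        have hlep : p.length ≤ b.length := hpb
        have hptake : p = List.take p.length (b ++ pvRepl a b (List.drop a.length (c :: t))) :=
          List.prefix_iff_eq_take.mp h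
        rw [List.take_append_of_le_length hlep] at hptake
        have hpfxb : p <+: b := hptake ▸ List.take_prefix _ _
        have hdot : '.' ∈ p := by rw [hp]; simp
        exact hb (hpfxb.subset hdot)
      · rw [pvRepl_cons_false b hpre] at h
        cases p with
        | nil => exact List.nil_prefix
        | cons d p' =>
          obtain ⟨hdc, hp'⟩ := List.cons_prefix_cons.mp h
          subst hdc
          cases q with
          | nil =>
            simp only [List.nil_append, List.cons.injEq] at hp
            obtain ⟨-, hp2⟩ := hp
            subst hp2
            exact List.cons_prefix_cons.mpr ⟨rfl, List.nil_prefix⟩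
          | cons e q' =>
            simp only [List.cons_append, List.cons.injEq] at hp
            have hq' : '.' ∉ q' := fun hm => hq (List.mem_cons_of_mem _ hm)
            have hlen' : p'.length ≤ b.length := by
              simp only [List.length_cons] at hpb; omega
            have hlt : t.length ≤ n := by
              simp only [List.length_cons] at hl; omega
            exact List.cons_prefix_cons.mpr ⟨rfl, ih p' q' t hp.2 hq' hlen' hlt hp'⟩

lemma pvStable' {b p q : List Char} (hb : '.' ∉ b) (hp : p = q ++ ['.']) (hq : '.' ∉ q)
    (hpb : p.length ≤ b.length) (a l : List Char) (h : p <+: pvRepl a b l) : p <+: l :=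
  pvStableN hb a l.length p q l hp hq hpb le_rfl h

def pvGoodExp (ps : List (List Char × List Char)) : Bool :=
  ps.all fun pr => decide (4 ≤ pr.2.length) && decide ('.' ∉ pr.2)

lemma pvGoodExp_cons {pr : List Char × List Char} {ps : List (List Char × List Char)}
    (h : pvGoodExp (pr :: ps) = true) :
    (4 ≤ pr.2.length ∧ '.' ∉ pr.2) ∧ pvGoodExp ps = true := by
  simp only [pvGoodExp, List.all_cons, Bool.and_eq_true, decide_eq_true_eq] at h
  exact ⟨h.1, h.2⟩

lemma pvShiftFold {k : List Char} :
    ∀ ps l, (∀ pr ∈ ps, pvBlocked k pr.1 = true) →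
      pvFold ps (k ++ l) = k ++ pvFold ps l := by
  intro ps
  induction ps with
  | nil => intro l _; rfl
  | cons pr ps ih =>
    intro l hb
    rw [show pvFold (pr :: ps) (k ++ l) = pvFold ps (pvRepl pr.1 pr.2 (k ++ l)) from rfl,
        pvShiftB pr.2 (hb pr List.mem_cons_self) l,
        ih _ (fun x hx => hb x (List.mem_cons_of_mem _ hx)),
        show pvFold (pr :: ps) l = pvFold ps (pvRepl pr.1 pr.2 l) from rfl]

lemma pvPeel :
    ∀ ps (c : Char) (t : List Char), pvGoodExp ps = true →
      (∀ pr ∈ ps, pr.1 = pr.1.dropLast ++ ['.'] ∧ '.' ∉ pr.1.dropLast ∧ pr.1.length ≤ 4) →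
      (∀ pr ∈ ps, ¬ pr.1 <+: (c :: t)) →
      pvFold ps (c :: t) = c :: pvFold ps t := by
  intro ps
  induction ps with
  | nil => intro c t _ _ _; rfl
  | cons pr ps ih =>
    intro c t hg hshape hpfx
    obtain ⟨⟨h4, hdot⟩, hg'⟩ := pvGoodExp_cons hg
    have hnp : ¬ pr.1 <+: (c :: t) := hpfx pr List.mem_cons_self
    have hstep : pvRepl pr.1 pr.2 (c :: t) = c :: pvRepl pr.1 pr.2 t := pvRepl_cons_neg pr.2 hnp
    have hpfx' : ∀ pr' ∈ ps, ¬ pr'.1 <+: (c :: pvRepl pr.1 pr.2 t) := by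
      intro pr' hm hcon
      obtain ⟨hq1, hq2, hq4⟩ := hshape pr' (List.mem_cons_of_mem _ hm)
      have hcon' : pr'.1 <+: pvRepl pr.1 pr.2 (c :: t) := by rw [hstep]; exact hcon
      exact hpfx pr' (List.mem_cons_of_mem _ hm)
        (pvStable' hdot hq1 hq2 (le_trans hq4 h4) pr.1 (c :: t) hcon')
    rw [show pvFold (pr :: ps) (c :: t) = pvFold ps (pvRepl pr.1 pr.2 (c :: t)) from rfl,
        hstep, ih c (pvRepl pr.1 pr.2 t) hg'
          (fun x hx => hshape x (List.mem_cons_of_mem _ hx)) hpfx',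
        show pvFold (pr :: ps) t = pvFold ps (pvRepl pr.1 pr.2 t) from rfl]

lemma pvFold_append (ps qs : List (List Char × List Char)) (l : List Char) :
    pvFold (ps ++ qs) l = pvFold qs (pvFold ps l) := by
  simp [pvFold, List.foldl_append]

lemma pvBranch (pre post : List (List Char × List Char)) (k e t : List Char) (hk : k ≠ [])
    (h1 : ∀ pr ∈ pre, pvBlocked k pr.1 = true)
    (h2 : ∀ pr ∈ post, pvBlocked e pr.1 = true) :
    pvFold (pre ++ (k, e) :: post) (k ++ t) = e ++ pvFold (pre ++ (k, e) :: post) t := by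
  rw [pvFold_append, pvFold_append, pvShiftFold pre t h1,
      show pvFold ((k, e) :: post) (k ++ pvFold pre t)
        = pvFold post (pvRepl k e (k ++ pvFold pre t)) from rfl,
      pvRepl_match e hk (pvFold pre t), pvShiftFold post _ h2,
      show pvFold ((k, e) :: post) (pvFold pre t)
        = pvFold post (pvRepl k e (pvFold pre t)) from rfl]

theorem pvAbbrs_key_nonempty : ∀ p ∈ pvAbbrs, 0 < p.1.length := by decide

lemma pvHstG (v : List Char) (hv : ¬ (['t','.'] <+: v)) :
    ∀ m, m < (['m','i','s','e','s','s'] : List Char).length → ¬ (['s','t','.'] <+: (List.drop m ['m','i','s','e','s','s'] ++ v)) := by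
  intro m hm
  simp only [List.length_cons, List.length_nil] at hm
  interval_cases m
  · exact pvNotPfx (j := 0) (by decide) (by decide) (by decide)
  · exact pvNotPfx (j := 0) (by decide) (by decide) (by decide)
  · exact pvNotPfx (j := 1) (by decide) (by decide) (by decide)
  · exact pvNotPfx (j := 0) (by decide) (by decide) (by decide)
  · exact pvNotPfx (j := 1) (by decide) (by decide) (by decide)
  · intro hc
    exact hv (List.cons_prefix_cons.mp hc).2

lemma pvHsrG (v : List Char) (hv : ¬ (['r','.'] <+: v)) :
    ∀ m, m < (['m','i','s','e','s','s'] : List Char).length → ¬ (['s','r','.'] <+: (List.drop m ['m','i','s','e','s','s'] ++ v)) := by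
  intro m hm
  simp only [List.length_cons, List.length_nil] at hm
  interval_cases m
  · exact pvNotPfx (j := 0) (by decide) (by decide) (by decide)
  · exact pvNotPfx (j := 0) (by decide) (by decide) (by decide)
  · exact pvNotPfx (j := 1) (by decide) (by decide) (by decide)
  · exact pvNotPfx (j := 0) (by decide) (by decide) (by decide)
  · exact pvNotPfx (j := 1) (by decide) (by decide) (by decide)
  · intro hc
    exact hv (List.cons_prefix_cons.mp hc).2

lemma pvBranch2 (t : List Char) (ht : ¬ (['t','.'] <+: t)) (hr : ¬ (['r','.'] <+: t)) :
    pvFold pvAbbrs (['m','r','s','.'] ++ t) = ['m','i','s','e','s','s'] ++ pvFold pvAbbrs t := by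
  have hstab_t : ¬ (['t','.'] <+: (pvRepl ['d','r','.'] ['d','o','c','t','o','r'] (pvRepl ['m','r','s','.'] ['m','i','s','e','s','s'] (pvRepl ['m','r','.'] ['m','i','s','t','e','r'] t)))) := by
    intro hc
    have s0 := pvStable' (b := ['d','o','c','t','o','r']) (q := ['t']) (by decide) rfl (by decide) (by decide) ['d','r','.'] _ hc
    have s1 := pvStable' (b := ['m','i','s','e','s','s']) (q := ['t']) (by decide) rfl (by decide) (by decide) ['m','r','s','.'] _ s0
    have s2 := pvStable' (b := ['m','i','s','t','e','r']) (q := ['t']) (by decide) rfl (by decide) (by decide) ['m','r','.'] _ s1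
    exact ht s2
  have hstab_r : ¬ (['r','.'] <+: (pvRepl ['j','r','.'] ['j','u','n','i','o','r'] (pvRepl ['c','o','.'] ['c','o','m','p','a','n','y'] (pvRepl ['s','t','.'] ['s','a','i','n','t'] (pvRepl ['d','r','.'] ['d','o','c','t','o','r'] (pvRepl ['m','r','s','.'] ['m','i','s','e','s','s'] (pvRepl ['m','r','.'] ['m','i','s','t','e','r'] t))))))) := by
    intro hc
    have s0 := pvStable' (b := ['j','u','n','i','o','r']) (q := ['r']) (by decide) rfl (by decide) (by decide) ['j','r','.'] _ hc
    have s1 := pvStable' (b := ['c','o','m','p','a','n','y']) (q := ['r']) (by decide) rfl (by decide) (by decide) ['c','o','.'] _ s0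
    have s2 := pvStable' (b := ['s','a','i','n','t']) (q := ['r']) (by decide) rfl (by decide) (by decide) ['s','t','.'] _ s1
    have s3 := pvStable' (b := ['d','o','c','t','o','r']) (q := ['r']) (by decide) rfl (by decide) (by decide) ['d','r','.'] _ s2
    have s4 := pvStable' (b := ['m','i','s','e','s','s']) (q := ['r']) (by decide) rfl (by decide) (by decide) ['m','r','s','.'] _ s3
    have s5 := pvStable' (b := ['m','i','s','t','e','r']) (q := ['r']) (by decide) rfl (by decide) (by decide) ['m','r','.'] _ s4
    exact hr s5
  simp only [pvAbbrs, pvFold, List.foldl_cons, List.foldl_nil]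
  rw [pvShiftB ['m','i','s','t','e','r'] (by decide : pvBlocked ['m','r','s','.'] ['m','r','.'] = true) t,
      pvRepl_match ['m','i','s','e','s','s'] (by decide : (['m','r','s','.'] : List Char) ≠ []) (pvRepl ['m','r','.'] ['m','i','s','t','e','r'] t),
      pvShiftB ['d','o','c','t','o','r'] (by decide : pvBlocked ['m','i','s','e','s','s'] ['d','r','.'] = true) _,
      pvShiftH ['m','i','s','e','s','s'] _ (pvHstG (pvRepl ['d','r','.'] ['d','o','c','t','o','r'] (pvRepl ['m','r','s','.'] ['m','i','s','e','s','s'] (pvRepl ['m','r','.'] ['m','i','s','t','e','r'] t))) hstab_t),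
      pvShiftB ['c','o','m','p','a','n','y'] (by decide : pvBlocked ['m','i','s','e','s','s'] ['c','o','.'] = true) _,
      pvShiftB ['j','u','n','i','o','r'] (by decide : pvBlocked ['m','i','s','e','s','s'] ['j','r','.'] = true) _,
      pvShiftH ['m','i','s','e','s','s'] _ (pvHsrG (pvRepl ['j','r','.'] ['j','u','n','i','o','r'] (pvRepl ['c','o','.'] ['c','o','m','p','a','n','y'] (pvRepl ['s','t','.'] ['s','a','i','n','t'] (pvRepl ['d','r','.'] ['d','o','c','t','o','r'] (pvRepl ['m','r','s','.'] ['m','i','s','e','s','s'] (pvRepl ['m','r','.'] ['m','i','s','t','e','r'] t)))))) hstab_r),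
      pvShiftB ['e','t',' ','c','e','t','e','r','a'] (by decide : pvBlocked ['m','i','s','e','s','s'] ['e','t','c','.'] = true) _,
      pvShiftB ['v','e','r','s','u','s'] (by decide : pvBlocked ['m','i','s','e','s','s'] ['v','s','.'] = true) _,
      pvShiftB ['l','i','m','i','t','e','d'] (by decide : pvBlocked ['m','i','s','e','s','s'] ['l','t','d','.'] = true) _]

lemma pvScan_nil : pvScan [] = [] := rfl

lemma pvScanGo_fuel : ∀ f1 f2 l, l.length ≤ f1 → l.length ≤ f2 → pvScanGo f1 l = pvScanGo f2 l := by
  intro f1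
  induction f1 with
  | zero =>
    intro f2 l h1 _
    have : l = [] := List.eq_nil_of_length_eq_zero (Nat.le_zero.mp h1)
    subst this
    cases f2 <;> rfl
  | succ n ihf =>
    intro f2 l h1 h2
    cases l with
    | nil => cases f2 <;> rfl
    | cons c t =>
      cases f2 with
      | zero => simp only [List.length_cons] at h2; omega
      | succ m =>
        rcases hfind : pvAbbrs.find? (fun p => p.1.isPrefixOf (c :: t)) with _ | p
        · simp only [pvScanGo, hfind]
          simp only [List.length_cons] at h1 h2
          rw [ihf m t (by omega) (by omega)]
        · have hk := pvAbbrs_key_nonempty p (List.mem_of_find?_eq_some hfind)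
          simp only [pvScanGo, hfind]
          simp only [List.length_cons] at h1 h2
          rw [ihf m (List.drop p.1.length (c :: t))
            (by simp only [List.length_drop, List.length_cons]; omega)
            (by simp only [List.length_drop, List.length_cons]; omega)]

lemma pvScan_cons_matched {c : Char} {t : List Char} {p : List Char × List Char}
    (h : pvAbbrs.find? (fun p => p.1.isPrefixOf (c :: t)) = some p) :
    pvScan (c :: t) = p.2 ++ pvScan (List.drop p.1.length (c :: t)) := by
  have hk := pvAbbrs_key_nonempty p (List.mem_of_find?_eq_some h)
  show pvScanGo (c :: t).length (c :: t) = _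
  rw [show (c :: t).length = t.length + 1 from rfl]
  simp only [pvScanGo, h]
  unfold pvScan
  congr 1
  exact pvScanGo_fuel t.length (List.drop p.1.length (c :: t)).length _
    (by simp only [List.length_drop, List.length_cons]; omega) le_rfl

lemma pvScan_cons_none {c : Char} {t : List Char}
    (h : pvAbbrs.find? (fun p => p.1.isPrefixOf (c :: t)) = none) :
    pvScan (c :: t) = c :: pvScan t := by
  show pvScanGo (c :: t).length (c :: t) = _
  rw [show (c :: t).length = t.length + 1 from rfl]
  simp only [pvScanGo, h]
  rfl

lemma pvMainN :
    ∀ n l, l.length ≤ n → ¬ (['m','r','s','.','t','.'] <:+: l) → ¬ (['m','r','s','.','r','.'] <:+: l) →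
      pvFold pvAbbrs l = pvScan l := by
  intro n
  induction n with
  | zero =>
    intro l hl _ _
    have hnil : l = [] := List.eq_nil_of_length_eq_zero (Nat.le_zero.mp hl)
    subst hnil
    rw [pvFold_nil, pvScan_nil]
  | succ n ih =>
    intro l hl hD1 hD2
    by_cases h1 : (['m','r','.'] : List Char) <+: l
    · obtain ⟨t, rfl⟩ := h1
      have hlt : t.length ≤ n := by
        simp only [List.length_append, List.length_cons, List.length_nil] at hl
        omega
      have hd1 : ¬ (['m','r','s','.','t','.'] <:+: t) := fun hc => hD1 (hc.trans ⟨['m','r','.'], [], by simp⟩)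
      have hd2 : ¬ (['m','r','s','.','r','.'] <:+: t) := fun hc => hD2 (hc.trans ⟨['m','r','.'], [], by simp⟩)
      have habb : pvAbbrs = [] ++ (['m','r','.'], ['m','i','s','t','e','r']) :: [(['m','r','s','.'], ['m','i','s','e','s','s']), (['d','r','.'], ['d','o','c','t','o','r']), (['s','t','.'], ['s','a','i','n','t']), (['c','o','.'], ['c','o','m','p','a','n','y']), (['j','r','.'], ['j','u','n','i','o','r']), (['s','r','.'], ['s','e','n','i','o','r']), (['e','t','c','.'], ['e','t',' ','c','e','t','e','r','a']), (['v','s','.'], ['v','e','r','s','u','s']), (['l','t','d','.'], ['l','i','m','i','t','e','d'])] := by decide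
      have hA : pvFold pvAbbrs (['m','r','.'] ++ t) = ['m','i','s','t','e','r'] ++ pvFold pvAbbrs t := by
        rw [habb]
        exact pvBranch [] [(['m','r','s','.'], ['m','i','s','e','s','s']), (['d','r','.'], ['d','o','c','t','o','r']), (['s','t','.'], ['s','a','i','n','t']), (['c','o','.'], ['c','o','m','p','a','n','y']), (['j','r','.'], ['j','u','n','i','o','r']), (['s','r','.'], ['s','e','n','i','o','r']), (['e','t','c','.'], ['e','t',' ','c','e','t','e','r','a']), (['v','s','.'], ['v','e','r','s','u','s']), (['l','t','d','.'], ['l','i','m','i','t','e','d'])] ['m','r','.'] ['m','i','s','t','e','r'] t (by decide) (by decide) (by decide)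
      have hf : pvAbbrs.find? (fun p => p.1.isPrefixOf ('m' :: 'r' :: '.' :: t)) = some ((['m','r','.'], ['m','i','s','t','e','r'])) := rfl
      rw [hA, show (['m','r','.'] ++ t : List Char) = 'm' :: 'r' :: '.' :: t from rfl, pvScan_cons_matched hf,
          ih t hlt hd1 hd2]
      try rfl
    by_cases h2 : (['m','r','s','.'] : List Char) <+: l
    · obtain ⟨t, rfl⟩ := h2
      have hlt : t.length ≤ n := by
        simp only [List.length_append, List.length_cons, List.length_nil] at hl
        omega
      have hd1 : ¬ (['m','r','s','.','t','.'] <:+: t) := fun hc => hD1 (hc.trans ⟨['m','r','s','.'], [], by simp⟩)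
      have hd2 : ¬ (['m','r','s','.','r','.'] <:+: t) := fun hc => hD2 (hc.trans ⟨['m','r','s','.'], [], by simp⟩)
      have ht : ¬ (['t','.'] <+: t) := by
        intro hc
        obtain ⟨w, rfl⟩ := hc
        exact hD1 ⟨[], w, by simp⟩
      have hr : ¬ (['r','.'] <+: t) := by
        intro hc
        obtain ⟨w, rfl⟩ := hc
        exact hD2 ⟨[], w, by simp⟩
      have hA : pvFold pvAbbrs (['m','r','s','.'] ++ t) = ['m','i','s','e','s','s'] ++ pvFold pvAbbrs t := pvBranch2 t ht hr
      have hf : pvAbbrs.find? (fun p => p.1.isPrefixOf ('m' :: 'r' :: 's' :: '.' :: t)) = some ((['m','r','s','.'], ['m','i','s','e','s','s'])) := rfl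
      rw [hA, show (['m','r','s','.'] ++ t : List Char) = 'm' :: 'r' :: 's' :: '.' :: t from rfl, pvScan_cons_matched hf,
          ih t hlt hd1 hd2]
      try rfl
    by_cases h3 : (['d','r','.'] : List Char) <+: l
    · obtain ⟨t, rfl⟩ := h3
      have hlt : t.length ≤ n := by
        simp only [List.length_append, List.length_cons, List.length_nil] at hl
        omega
      have hd1 : ¬ (['m','r','s','.','t','.'] <:+: t) := fun hc => hD1 (hc.trans ⟨['d','r','.'], [], by simp⟩)
      have hd2 : ¬ (['m','r','s','.','r','.'] <:+: t) := fun hc => hD2 (hc.trans ⟨['d','r','.'], [], by simp⟩)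
      have habb : pvAbbrs = [(['m','r','.'], ['m','i','s','t','e','r']), (['m','r','s','.'], ['m','i','s','e','s','s'])] ++ (['d','r','.'], ['d','o','c','t','o','r']) :: [(['s','t','.'], ['s','a','i','n','t']), (['c','o','.'], ['c','o','m','p','a','n','y']), (['j','r','.'], ['j','u','n','i','o','r']), (['s','r','.'], ['s','e','n','i','o','r']), (['e','t','c','.'], ['e','t',' ','c','e','t','e','r','a']), (['v','s','.'], ['v','e','r','s','u','s']), (['l','t','d','.'], ['l','i','m','i','t','e','d'])] := by decide
      have hA : pvFold pvAbbrs (['d','r','.'] ++ t) = ['d','o','c','t','o','r'] ++ pvFold pvAbbrs t := by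
        rw [habb]
        exact pvBranch [(['m','r','.'], ['m','i','s','t','e','r']), (['m','r','s','.'], ['m','i','s','e','s','s'])] [(['s','t','.'], ['s','a','i','n','t']), (['c','o','.'], ['c','o','m','p','a','n','y']), (['j','r','.'], ['j','u','n','i','o','r']), (['s','r','.'], ['s','e','n','i','o','r']), (['e','t','c','.'], ['e','t',' ','c','e','t','e','r','a']), (['v','s','.'], ['v','e','r','s','u','s']), (['l','t','d','.'], ['l','i','m','i','t','e','d'])] ['d','r','.'] ['d','o','c','t','o','r'] t (by decide) (by decide) (by decide)
      have hf : pvAbbrs.find? (fun p => p.1.isPrefixOf ('d' :: 'r' :: '.' :: t)) = some ((['d','r','.'], ['d','o','c','t','o','r'])) := rfl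
      rw [hA, show (['d','r','.'] ++ t : List Char) = 'd' :: 'r' :: '.' :: t from rfl, pvScan_cons_matched hf,
          ih t hlt hd1 hd2]
      try rfl
    by_cases h4 : (['s','t','.'] : List Char) <+: l
    · obtain ⟨t, rfl⟩ := h4
      have hlt : t.length ≤ n := by
        simp only [List.length_append, List.length_cons, List.length_nil] at hl
        omega
      have hd1 : ¬ (['m','r','s','.','t','.'] <:+: t) := fun hc => hD1 (hc.trans ⟨['s','t','.'], [], by simp⟩)
      have hd2 : ¬ (['m','r','s','.','r','.'] <:+: t) := fun hc => hD2 (hc.trans ⟨['s','t','.'], [], by simp⟩)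
      have habb : pvAbbrs = [(['m','r','.'], ['m','i','s','t','e','r']), (['m','r','s','.'], ['m','i','s','e','s','s']), (['d','r','.'], ['d','o','c','t','o','r'])] ++ (['s','t','.'], ['s','a','i','n','t']) :: [(['c','o','.'], ['c','o','m','p','a','n','y']), (['j','r','.'], ['j','u','n','i','o','r']), (['s','r','.'], ['s','e','n','i','o','r']), (['e','t','c','.'], ['e','t',' ','c','e','t','e','r','a']), (['v','s','.'], ['v','e','r','s','u','s']), (['l','t','d','.'], ['l','i','m','i','t','e','d'])] := by decide
      have hA : pvFold pvAbbrs (['s','t','.'] ++ t) = ['s','a','i','n','t'] ++ pvFold pvAbbrs t := by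
        rw [habb]
        exact pvBranch [(['m','r','.'], ['m','i','s','t','e','r']), (['m','r','s','.'], ['m','i','s','e','s','s']), (['d','r','.'], ['d','o','c','t','o','r'])] [(['c','o','.'], ['c','o','m','p','a','n','y']), (['j','r','.'], ['j','u','n','i','o','r']), (['s','r','.'], ['s','e','n','i','o','r']), (['e','t','c','.'], ['e','t',' ','c','e','t','e','r','a']), (['v','s','.'], ['v','e','r','s','u','s']), (['l','t','d','.'], ['l','i','m','i','t','e','d'])] ['s','t','.'] ['s','a','i','n','t'] t (by decide) (by decide) (by decide)
      have hf : pvAbbrs.find? (fun p => p.1.isPrefixOf ('s' :: 't' :: '.' :: t)) = some ((['s','t','.'], ['s','a','i','n','t'])) := rfl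
      rw [hA, show (['s','t','.'] ++ t : List Char) = 's' :: 't' :: '.' :: t from rfl, pvScan_cons_matched hf,
          ih t hlt hd1 hd2]
      try rfl
    by_cases h5 : (['c','o','.'] : List Char) <+: l
    · obtain ⟨t, rfl⟩ := h5
      have hlt : t.length ≤ n := by
        simp only [List.length_append, List.length_cons, List.length_nil] at hl
        omega
      have hd1 : ¬ (['m','r','s','.','t','.'] <:+: t) := fun hc => hD1 (hc.trans ⟨['c','o','.'], [], by simp⟩)
      have hd2 : ¬ (['m','r','s','.','r','.'] <:+: t) := fun hc => hD2 (hc.trans ⟨['c','o','.'], [], by simp⟩)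
      have habb : pvAbbrs = [(['m','r','.'], ['m','i','s','t','e','r']), (['m','r','s','.'], ['m','i','s','e','s','s']), (['d','r','.'], ['d','o','c','t','o','r']), (['s','t','.'], ['s','a','i','n','t'])] ++ (['c','o','.'], ['c','o','m','p','a','n','y']) :: [(['j','r','.'], ['j','u','n','i','o','r']), (['s','r','.'], ['s','e','n','i','o','r']), (['e','t','c','.'], ['e','t',' ','c','e','t','e','r','a']), (['v','s','.'], ['v','e','r','s','u','s']), (['l','t','d','.'], ['l','i','m','i','t','e','d'])] := by decide
      have hA : pvFold pvAbbrs (['c','o','.'] ++ t) = ['c','o','m','p','a','n','y'] ++ pvFold pvAbbrs t := by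
        rw [habb]
        exact pvBranch [(['m','r','.'], ['m','i','s','t','e','r']), (['m','r','s','.'], ['m','i','s','e','s','s']), (['d','r','.'], ['d','o','c','t','o','r']), (['s','t','.'], ['s','a','i','n','t'])] [(['j','r','.'], ['j','u','n','i','o','r']), (['s','r','.'], ['s','e','n','i','o','r']), (['e','t','c','.'], ['e','t',' ','c','e','t','e','r','a']), (['v','s','.'], ['v','e','r','s','u','s']), (['l','t','d','.'], ['l','i','m','i','t','e','d'])] ['c','o','.'] ['c','o','m','p','a','n','y'] t (by decide) (by decide) (by decide)
      have hf : pvAbbrs.find? (fun p => p.1.isPrefixOf ('c' :: 'o' :: '.' :: t)) = some ((['c','o','.'], ['c','o','m','p','a','n','y'])) := rfl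
      rw [hA, show (['c','o','.'] ++ t : List Char) = 'c' :: 'o' :: '.' :: t from rfl, pvScan_cons_matched hf,
          ih t hlt hd1 hd2]
      try rfl
    by_cases h6 : (['j','r','.'] : List Char) <+: l
    · obtain ⟨t, rfl⟩ := h6
      have hlt : t.length ≤ n := by
        simp only [List.length_append, List.length_cons, List.length_nil] at hl
        omega
      have hd1 : ¬ (['m','r','s','.','t','.'] <:+: t) := fun hc => hD1 (hc.trans ⟨['j','r','.'], [], by simp⟩)
      have hd2 : ¬ (['m','r','s','.','r','.'] <:+: t) := fun hc => hD2 (hc.trans ⟨['j','r','.'], [], by simp⟩)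
      have habb : pvAbbrs = [(['m','r','.'], ['m','i','s','t','e','r']), (['m','r','s','.'], ['m','i','s','e','s','s']), (['d','r','.'], ['d','o','c','t','o','r']), (['s','t','.'], ['s','a','i','n','t']), (['c','o','.'], ['c','o','m','p','a','n','y'])] ++ (['j','r','.'], ['j','u','n','i','o','r']) :: [(['s','r','.'], ['s','e','n','i','o','r']), (['e','t','c','.'], ['e','t',' ','c','e','t','e','r','a']), (['v','s','.'], ['v','e','r','s','u','s']), (['l','t','d','.'], ['l','i','m','i','t','e','d'])] := by decide
      have hA : pvFold pvAbbrs (['j','r','.'] ++ t) = ['j','u','n','i','o','r'] ++ pvFold pvAbbrs t := by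
        rw [habb]
        exact pvBranch [(['m','r','.'], ['m','i','s','t','e','r']), (['m','r','s','.'], ['m','i','s','e','s','s']), (['d','r','.'], ['d','o','c','t','o','r']), (['s','t','.'], ['s','a','i','n','t']), (['c','o','.'], ['c','o','m','p','a','n','y'])] [(['s','r','.'], ['s','e','n','i','o','r']), (['e','t','c','.'], ['e','t',' ','c','e','t','e','r','a']), (['v','s','.'], ['v','e','r','s','u','s']), (['l','t','d','.'], ['l','i','m','i','t','e','d'])] ['j','r','.'] ['j','u','n','i','o','r'] t (by decide) (by decide) (by decide)
      have hf : pvAbbrs.find? (fun p => p.1.isPrefixOf ('j' :: 'r' :: '.' :: t)) = some ((['j','r','.'], ['j','u','n','i','o','r'])) := rfl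
      rw [hA, show (['j','r','.'] ++ t : List Char) = 'j' :: 'r' :: '.' :: t from rfl, pvScan_cons_matched hf,
          ih t hlt hd1 hd2]
      try rfl
    by_cases h7 : (['s','r','.'] : List Char) <+: l
    · obtain ⟨t, rfl⟩ := h7
      have hlt : t.length ≤ n := by
        simp only [List.length_append, List.length_cons, List.length_nil] at hl
        omega
      have hd1 : ¬ (['m','r','s','.','t','.'] <:+: t) := fun hc => hD1 (hc.trans ⟨['s','r','.'], [], by simp⟩)
      have hd2 : ¬ (['m','r','s','.','r','.'] <:+: t) := fun hc => hD2 (hc.trans ⟨['s','r','.'], [], by simp⟩)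
      have habb : pvAbbrs = [(['m','r','.'], ['m','i','s','t','e','r']), (['m','r','s','.'], ['m','i','s','e','s','s']), (['d','r','.'], ['d','o','c','t','o','r']), (['s','t','.'], ['s','a','i','n','t']), (['c','o','.'], ['c','o','m','p','a','n','y']), (['j','r','.'], ['j','u','n','i','o','r'])] ++ (['s','r','.'], ['s','e','n','i','o','r']) :: [(['e','t','c','.'], ['e','t',' ','c','e','t','e','r','a']), (['v','s','.'], ['v','e','r','s','u','s']), (['l','t','d','.'], ['l','i','m','i','t','e','d'])] := by decide
      have hA : pvFold pvAbbrs (['s','r','.'] ++ t) = ['s','e','n','i','o','r'] ++ pvFold pvAbbrs t := by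
        rw [habb]
        exact pvBranch [(['m','r','.'], ['m','i','s','t','e','r']), (['m','r','s','.'], ['m','i','s','e','s','s']), (['d','r','.'], ['d','o','c','t','o','r']), (['s','t','.'], ['s','a','i','n','t']), (['c','o','.'], ['c','o','m','p','a','n','y']), (['j','r','.'], ['j','u','n','i','o','r'])] [(['e','t','c','.'], ['e','t',' ','c','e','t','e','r','a']), (['v','s','.'], ['v','e','r','s','u','s']), (['l','t','d','.'], ['l','i','m','i','t','e','d'])] ['s','r','.'] ['s','e','n','i','o','r'] t (by decide) (by decide) (by decide)
      have hf : pvAbbrs.find? (fun p => p.1.isPrefixOf ('s' :: 'r' :: '.' :: t)) = some ((['s','r','.'], ['s','e','n','i','o','r'])) := rfl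
      rw [hA, show (['s','r','.'] ++ t : List Char) = 's' :: 'r' :: '.' :: t from rfl, pvScan_cons_matched hf,
          ih t hlt hd1 hd2]
      try rfl
    by_cases h8 : (['e','t','c','.'] : List Char) <+: l
    · obtain ⟨t, rfl⟩ := h8
      have hlt : t.length ≤ n := by
        simp only [List.length_append, List.length_cons, List.length_nil] at hl
        omega
      have hd1 : ¬ (['m','r','s','.','t','.'] <:+: t) := fun hc => hD1 (hc.trans ⟨['e','t','c','.'], [], by simp⟩)
      have hd2 : ¬ (['m','r','s','.','r','.'] <:+: t) := fun hc => hD2 (hc.trans ⟨['e','t','c','.'], [], by simp⟩)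
      have habb : pvAbbrs = [(['m','r','.'], ['m','i','s','t','e','r']), (['m','r','s','.'], ['m','i','s','e','s','s']), (['d','r','.'], ['d','o','c','t','o','r']), (['s','t','.'], ['s','a','i','n','t']), (['c','o','.'], ['c','o','m','p','a','n','y']), (['j','r','.'], ['j','u','n','i','o','r']), (['s','r','.'], ['s','e','n','i','o','r'])] ++ (['e','t','c','.'], ['e','t',' ','c','e','t','e','r','a']) :: [(['v','s','.'], ['v','e','r','s','u','s']), (['l','t','d','.'], ['l','i','m','i','t','e','d'])] := by decide
      have hA : pvFold pvAbbrs (['e','t','c','.'] ++ t) = ['e','t',' ','c','e','t','e','r','a'] ++ pvFold pvAbbrs t := by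
        rw [habb]
        exact pvBranch [(['m','r','.'], ['m','i','s','t','e','r']), (['m','r','s','.'], ['m','i','s','e','s','s']), (['d','r','.'], ['d','o','c','t','o','r']), (['s','t','.'], ['s','a','i','n','t']), (['c','o','.'], ['c','o','m','p','a','n','y']), (['j','r','.'], ['j','u','n','i','o','r']), (['s','r','.'], ['s','e','n','i','o','r'])] [(['v','s','.'], ['v','e','r','s','u','s']), (['l','t','d','.'], ['l','i','m','i','t','e','d'])] ['e','t','c','.'] ['e','t',' ','c','e','t','e','r','a'] t (by decide) (by decide) (by decide)
      have hf : pvAbbrs.find? (fun p => p.1.isPrefixOf ('e' :: 't' :: 'c' :: '.' :: t)) = some ((['e','t','c','.'], ['e','t',' ','c','e','t','e','r','a'])) := rfl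
      rw [hA, show (['e','t','c','.'] ++ t : List Char) = 'e' :: 't' :: 'c' :: '.' :: t from rfl, pvScan_cons_matched hf,
          ih t hlt hd1 hd2]
      try rfl
    by_cases h9 : (['v','s','.'] : List Char) <+: l
    · obtain ⟨t, rfl⟩ := h9
      have hlt : t.length ≤ n := by
        simp only [List.length_append, List.length_cons, List.length_nil] at hl
        omega
      have hd1 : ¬ (['m','r','s','.','t','.'] <:+: t) := fun hc => hD1 (hc.trans ⟨['v','s','.'], [], by simp⟩)
      have hd2 : ¬ (['m','r','s','.','r','.'] <:+: t) := fun hc => hD2 (hc.trans ⟨['v','s','.'], [], by simp⟩)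
      have habb : pvAbbrs = [(['m','r','.'], ['m','i','s','t','e','r']), (['m','r','s','.'], ['m','i','s','e','s','s']), (['d','r','.'], ['d','o','c','t','o','r']), (['s','t','.'], ['s','a','i','n','t']), (['c','o','.'], ['c','o','m','p','a','n','y']), (['j','r','.'], ['j','u','n','i','o','r']), (['s','r','.'], ['s','e','n','i','o','r']), (['e','t','c','.'], ['e','t',' ','c','e','t','e','r','a'])] ++ (['v','s','.'], ['v','e','r','s','u','s']) :: [(['l','t','d','.'], ['l','i','m','i','t','e','d'])] := by decide
      have hA : pvFold pvAbbrs (['v','s','.'] ++ t) = ['v','e','r','s','u','s'] ++ pvFold pvAbbrs t := by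
        rw [habb]
        exact pvBranch [(['m','r','.'], ['m','i','s','t','e','r']), (['m','r','s','.'], ['m','i','s','e','s','s']), (['d','r','.'], ['d','o','c','t','o','r']), (['s','t','.'], ['s','a','i','n','t']), (['c','o','.'], ['c','o','m','p','a','n','y']), (['j','r','.'], ['j','u','n','i','o','r']), (['s','r','.'], ['s','e','n','i','o','r']), (['e','t','c','.'], ['e','t',' ','c','e','t','e','r','a'])] [(['l','t','d','.'], ['l','i','m','i','t','e','d'])] ['v','s','.'] ['v','e','r','s','u','s'] t (by decide) (by decide) (by decide)
      have hf : pvAbbrs.find? (fun p => p.1.isPrefixOf ('v' :: 's' :: '.' :: t)) = some ((['v','s','.'], ['v','e','r','s','u','s'])) := rfl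
      rw [hA, show (['v','s','.'] ++ t : List Char) = 'v' :: 's' :: '.' :: t from rfl, pvScan_cons_matched hf,
          ih t hlt hd1 hd2]
      try rfl
    by_cases h10 : (['l','t','d','.'] : List Char) <+: l
    · obtain ⟨t, rfl⟩ := h10
      have hlt : t.length ≤ n := by
        simp only [List.length_append, List.length_cons, List.length_nil] at hl
        omega
      have hd1 : ¬ (['m','r','s','.','t','.'] <:+: t) := fun hc => hD1 (hc.trans ⟨['l','t','d','.'], [], by simp⟩)
      have hd2 : ¬ (['m','r','s','.','r','.'] <:+: t) := fun hc => hD2 (hc.trans ⟨['l','t','d','.'], [], by simp⟩)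
      have habb : pvAbbrs = [(['m','r','.'], ['m','i','s','t','e','r']), (['m','r','s','.'], ['m','i','s','e','s','s']), (['d','r','.'], ['d','o','c','t','o','r']), (['s','t','.'], ['s','a','i','n','t']), (['c','o','.'], ['c','o','m','p','a','n','y']), (['j','r','.'], ['j','u','n','i','o','r']), (['s','r','.'], ['s','e','n','i','o','r']), (['e','t','c','.'], ['e','t',' ','c','e','t','e','r','a']), (['v','s','.'], ['v','e','r','s','u','s'])] ++ (['l','t','d','.'], ['l','i','m','i','t','e','d']) :: [] := by decide
      have hA : pvFold pvAbbrs (['l','t','d','.'] ++ t) = ['l','i','m','i','t','e','d'] ++ pvFold pvAbbrs t := by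
        rw [habb]
        exact pvBranch [(['m','r','.'], ['m','i','s','t','e','r']), (['m','r','s','.'], ['m','i','s','e','s','s']), (['d','r','.'], ['d','o','c','t','o','r']), (['s','t','.'], ['s','a','i','n','t']), (['c','o','.'], ['c','o','m','p','a','n','y']), (['j','r','.'], ['j','u','n','i','o','r']), (['s','r','.'], ['s','e','n','i','o','r']), (['e','t','c','.'], ['e','t',' ','c','e','t','e','r','a']), (['v','s','.'], ['v','e','r','s','u','s'])] [] ['l','t','d','.'] ['l','i','m','i','t','e','d'] t (by decide) (by decide) (by decide)
      have hf : pvAbbrs.find? (fun p => p.1.isPrefixOf ('l' :: 't' :: 'd' :: '.' :: t)) = some ((['l','t','d','.'], ['l','i','m','i','t','e','d'])) := rfl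
      rw [hA, show (['l','t','d','.'] ++ t : List Char) = 'l' :: 't' :: 'd' :: '.' :: t from rfl, pvScan_cons_matched hf,
          ih t hlt hd1 hd2]
      try rfl
    cases l with
    | nil => rw [pvFold_nil, pvScan_nil]
    | cons c t =>
      have hlt : t.length ≤ n := by
        simp only [List.length_cons] at hl
        omega
      have hA : pvFold pvAbbrs (c :: t) = c :: pvFold pvAbbrs t := by
        apply pvPeel pvAbbrs c t (by decide) (by decide)
        intro pr hm
        fin_cases hm
        exacts [h1, h2, h3, h4, h5, h6, h7, h8, h9, h10]
      have hn0 : ((fun p : List Char × List Char => p.1.isPrefixOf (c :: t)) ((['m','r','.'], ['m','i','s','t','e','r']))) ≠ true :=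
        fun hx => h1 (List.isPrefixOf_iff_prefix.mp hx)
      have hn1 : ((fun p : List Char × List Char => p.1.isPrefixOf (c :: t)) ((['m','r','s','.'], ['m','i','s','e','s','s']))) ≠ true :=
        fun hx => h2 (List.isPrefixOf_iff_prefix.mp hx)
      have hn2 : ((fun p : List Char × List Char => p.1.isPrefixOf (c :: t)) ((['d','r','.'], ['d','o','c','t','o','r']))) ≠ true :=
        fun hx => h3 (List.isPrefixOf_iff_prefix.mp hx)
      have hn3 : ((fun p : List Char × List Char => p.1.isPrefixOf (c :: t)) ((['s','t','.'], ['s','a','i','n','t']))) ≠ true :=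
        fun hx => h4 (List.isPrefixOf_iff_prefix.mp hx)
      have hn4 : ((fun p : List Char × List Char => p.1.isPrefixOf (c :: t)) ((['c','o','.'], ['c','o','m','p','a','n','y']))) ≠ true :=
        fun hx => h5 (List.isPrefixOf_iff_prefix.mp hx)
      have hn5 : ((fun p : List Char × List Char => p.1.isPrefixOf (c :: t)) ((['j','r','.'], ['j','u','n','i','o','r']))) ≠ true :=
        fun hx => h6 (List.isPrefixOf_iff_prefix.mp hx)
      have hn6 : ((fun p : List Char × List Char => p.1.isPrefixOf (c :: t)) ((['s','r','.'], ['s','e','n','i','o','r']))) ≠ true :=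
        fun hx => h7 (List.isPrefixOf_iff_prefix.mp hx)
      have hn7 : ((fun p : List Char × List Char => p.1.isPrefixOf (c :: t)) ((['e','t','c','.'], ['e','t',' ','c','e','t','e','r','a']))) ≠ true :=
        fun hx => h8 (List.isPrefixOf_iff_prefix.mp hx)
      have hn8 : ((fun p : List Char × List Char => p.1.isPrefixOf (c :: t)) ((['v','s','.'], ['v','e','r','s','u','s']))) ≠ true :=
        fun hx => h9 (List.isPrefixOf_iff_prefix.mp hx)
      have hn9 : ((fun p : List Char × List Char => p.1.isPrefixOf (c :: t)) ((['l','t','d','.'], ['l','i','m','i','t','e','d']))) ≠ true :=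
        fun hx => h10 (List.isPrefixOf_iff_prefix.mp hx)
      have hf : pvAbbrs.find? (fun p => p.1.isPrefixOf (c :: t)) = none := by
        rw [show pvAbbrs = [(['m','r','.'], ['m','i','s','t','e','r']), (['m','r','s','.'], ['m','i','s','e','s','s']), (['d','r','.'], ['d','o','c','t','o','r']), (['s','t','.'], ['s','a','i','n','t']), (['c','o','.'], ['c','o','m','p','a','n','y']), (['j','r','.'], ['j','u','n','i','o','r']), (['s','r','.'], ['s','e','n','i','o','r']), (['e','t','c','.'], ['e','t',' ','c','e','t','e','r','a']), (['v','s','.'], ['v','e','r','s','u','s']), (['l','t','d','.'], ['l','i','m','i','t','e','d'])] from rfl]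
        rw [List.find?_cons_of_neg (p := fun p : List Char × List Char => p.1.isPrefixOf (c :: t)) hn0,
            List.find?_cons_of_neg (p := fun p : List Char × List Char => p.1.isPrefixOf (c :: t)) hn1,
            List.find?_cons_of_neg (p := fun p : List Char × List Char => p.1.isPrefixOf (c :: t)) hn2,
            List.find?_cons_of_neg (p := fun p : List Char × List Char => p.1.isPrefixOf (c :: t)) hn3,
            List.find?_cons_of_neg (p := fun p : List Char × List Char => p.1.isPrefixOf (c :: t)) hn4,
            List.find?_cons_of_neg (p := fun p : List Char × List Char => p.1.isPrefixOf (c :: t)) hn5,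
            List.find?_cons_of_neg (p := fun p : List Char × List Char => p.1.isPrefixOf (c :: t)) hn6,
            List.find?_cons_of_neg (p := fun p : List Char × List Char => p.1.isPrefixOf (c :: t)) hn7,
            List.find?_cons_of_neg (p := fun p : List Char × List Char => p.1.isPrefixOf (c :: t)) hn8,
            List.find?_cons_of_neg (p := fun p : List Char × List Char => p.1.isPrefixOf (c :: t)) hn9,
            List.find?_nil]
      rw [hA, pvScan_cons_none hf,
          ih t hlt (fun hc => hD1 (List.infix_cons hc)) (fun hc => hD2 (List.infix_cons hc))]
      try rfl

-- ===== tightness: A ≠ B everywhere inside D_ =====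

-- decomposing an infix of an append
lemma pvInfixAppend {u x y : List Char} (h : u <:+: x ++ y) :
    u <:+: x ∨ u <:+: y ∨
      ∃ u₁ u₂, u = u₁ ++ u₂ ∧ u₁ ≠ [] ∧ u₂ ≠ [] ∧ u₁ <:+ x ∧ u₂ <+: y := by
  obtain ⟨a, b, hab⟩ := h
  have hab' : a ++ (u ++ b) = x ++ y := by simpa [List.append_assoc] using hab
  by_cases hxa : x.length ≤ a.length
  · refine Or.inr (Or.inl ⟨a.drop x.length, b, ?_⟩)
    have h1 : (a ++ (u ++ b)).drop x.length = a.drop x.length ++ (u ++ b) :=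
      List.drop_append_of_le_length hxa
    rw [hab', List.drop_left] at h1
    simpa [List.append_assoc] using h1.symm
  · push_neg at hxa
    by_cases hxu : a.length + u.length ≤ x.length
    · refine Or.inl ⟨a, b.take (x.length - a.length - u.length), ?_⟩
      have h1 : (a ++ (u ++ b)).take x.length
          = a ++ (u ++ b).take (x.length - a.length) := by
        rw [List.take_append, List.take_of_length_le (by omega)]
      have h2 : (u ++ b).take (x.length - a.length)
          = u ++ b.take (x.length - a.length - u.length) := by
        rw [List.take_append, List.take_of_length_le (by omega)]
      rw [hab', List.take_left, h2] at h1
      simpa [List.append_assoc] using h1.symm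
    · push_neg at hxu
      have hu0 : 0 < u.length := by omega
      refine Or.inr (Or.inr ⟨u.take (x.length - a.length), u.drop (x.length - a.length),
        (List.take_append_drop _ _).symm, ?_, ?_, ?_, ?_⟩)
      · intro hc
        have := congrArg List.length hc
        simp only [List.length_take, List.length_nil] at this
        omega
      · intro hc
        have := congrArg List.length hc
        simp only [List.length_drop, List.length_nil] at this
        omega
      · refine ⟨a, ?_⟩
        have h1 : (a ++ (u ++ b)).take x.length
            = a ++ (u ++ b).take (x.length - a.length) := by
          rw [List.take_append, List.take_of_length_le (by omega)]
        have h2 : (u ++ b).take (x.length - a.length) = u.take (x.length - a.length) :=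
          List.take_append_of_le_length (by omega)
        rw [hab', List.take_left, h2] at h1
        exact h1.symm
      · have h1 : (a ++ (u ++ b)).drop x.length
            = a.drop x.length ++ (u ++ b).drop (x.length - a.length) :=
          List.drop_append
        have ha0 : a.drop x.length = [] := List.drop_eq_nil_of_le (by omega)
        have h2 : (u ++ b).drop (x.length - a.length)
            = u.drop (x.length - a.length) ++ b :=
          List.drop_append_of_le_length (by omega)
        rw [hab', List.drop_left, ha0, h2, List.nil_append] at h1
        exact ⟨b, h1.symm⟩

-- if no nonempty suffix of the key k is a prefix of the word u, an occurrence of u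
-- in k ++ t lies wholly in t
lemma pvOccDrop {u k t : List Char} (hlen : k.length < u.length)
    (htails : ∀ s ∈ k.tails, s = [] ∨ ¬ s <+: u)
    (h : u <:+: k ++ t) : u <:+: t := by
  rcases pvInfixAppend h with h | h | ⟨u₁, u₂, hu, hne1, _, hsuf, _⟩
  · exact absurd h.length_le (by omega)
  · exact h
  · rcases htails u₁ ((List.mem_tails _ _).mpr hsuf) with h0 | h0
    · exact absurd h0 hne1
    · exact absurd ⟨u₂, hu.symm⟩ h0

lemma pvOccDropMrsT {t : List Char} (hn : ¬ ['t','.'] <+: t)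
    (h : ['m','r','s','.','t','.'] <:+: (['m','r','s','.'] ++ t)) :
    ['m','r','s','.','t','.'] <:+: t := by
  rcases pvInfixAppend h with h | h | ⟨u₁, u₂, hu, hne1, _, hsuf, hpre⟩
  · exact absurd h.length_le (by decide)
  · exact h
  · have hmem : u₁ ∈ (['m','r','s','.'] : List Char).tails := (List.mem_tails _ _).mpr hsuf
    fin_cases hmem
    · simp only [List.cons.injEq, List.cons_append, List.nil_append] at hu
      obtain ⟨-, -, -, -, hu2⟩ := hu
      subst hu2
      exact absurd hpre hn
    · simp at hu
    · simp at hu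
    · simp at hu
    · exact absurd rfl hne1

lemma pvOccDropMrsR {t : List Char} (hn : ¬ ['r','.'] <+: t)
    (h : ['m','r','s','.','r','.'] <:+: (['m','r','s','.'] ++ t)) :
    ['m','r','s','.','r','.'] <:+: t := by
  rcases pvInfixAppend h with h | h | ⟨u₁, u₂, hu, hne1, _, hsuf, hpre⟩
  · exact absurd h.length_le (by decide)
  · exact h
  · have hmem : u₁ ∈ (['m','r','s','.'] : List Char).tails := (List.mem_tails _ _).mpr hsuf
    fin_cases hmem
    · simp only [List.cons.injEq, List.cons_append, List.nil_append] at hu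
      obtain ⟨-, -, -, -, hu2⟩ := hu
      subst hu2
      exact absurd hpre hn
    · simp at hu
    · simp at hu
    · simp at hu
    · exact absurd rfl hne1

-- "st." cannot match inside "mises" when "st." follows
lemma pvStG (X : List Char) :
    ∀ m, m < (['m','i','s','e','s'] : List Char).length →
      ¬ (['s','t','.'] <+: (List.drop m ['m','i','s','e','s'] ++ (['s','t','.'] ++ X))) := by
  intro m hm
  simp only [List.length_cons, List.length_nil] at hm
  interval_cases m
  · exact pvNotPfx (j := 0) (by decide) (by decide) (by decide)
  · exact pvNotPfx (j := 0) (by decide) (by decide) (by decide)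
  · exact pvNotPfx (j := 1) (by decide) (by decide) (by decide)
  · exact pvNotPfx (j := 0) (by decide) (by decide) (by decide)
  · intro hc
    simp only [List.drop, List.cons_append, List.nil_append] at hc
    exact absurd (List.cons_prefix_cons.mp (List.cons_prefix_cons.mp hc).2).1 (by decide)

-- "sr." cannot match inside "mises" when "sr." follows
lemma pvSrG (X : List Char) :
    ∀ m, m < (['m','i','s','e','s'] : List Char).length →
      ¬ (['s','r','.'] <+: (List.drop m ['m','i','s','e','s'] ++ (['s','r','.'] ++ X))) := by
  intro m hm
  simp only [List.length_cons, List.length_nil] at hm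
  interval_cases m
  · exact pvNotPfx (j := 0) (by decide) (by decide) (by decide)
  · exact pvNotPfx (j := 0) (by decide) (by decide) (by decide)
  · exact pvNotPfx (j := 1) (by decide) (by decide) (by decide)
  · exact pvNotPfx (j := 0) (by decide) (by decide) (by decide)
  · intro hc
    simp only [List.drop, List.cons_append, List.nil_append] at hc
    exact absurd (List.cons_prefix_cons.mp (List.cons_prefix_cons.mp hc).2).1 (by decide)

-- A's cascading passes on a text beginning "mrs.t." produce "misessaint" ++ …
lemma pvDivT (t : List Char) :
    ∃ r, pvFold pvAbbrs (['m','r','s','.','t','.'] ++ t)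
      = ['m','i','s','e','s','s','a','i','n','t'] ++ r := by
  refine ⟨pvRepl ['l','t','d','.'] ['l','i','m','i','t','e','d'] (pvRepl ['v','s','.'] ['v','e','r','s','u','s'] (pvRepl ['e','t','c','.'] ['e','t',' ','c','e','t','e','r','a'] (pvRepl ['s','r','.'] ['s','e','n','i','o','r'] (pvRepl ['j','r','.'] ['j','u','n','i','o','r'] (pvRepl ['c','o','.'] ['c','o','m','p','a','n','y'] (pvRepl ['s','t','.'] ['s','a','i','n','t'] (pvRepl ['d','r','.'] ['d','o','c','t','o','r'] (pvRepl ['m','r','s','.'] ['m','i','s','e','s','s'] (pvRepl ['m','r','.'] ['m','i','s','t','e','r'] t))))))))), ?_⟩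
  simp only [pvAbbrs, pvFold, List.foldl_cons, List.foldl_nil]
  rw [pvShiftB ['m','i','s','t','e','r'] (by decide : pvBlocked ['m','r','s','.','t','.'] ['m','r','.'] = true) t,
      show (['m','r','s','.','t','.'] : List Char) ++ pvRepl ['m','r','.'] ['m','i','s','t','e','r'] t
        = ['m','r','s','.'] ++ (['t','.'] ++ pvRepl ['m','r','.'] ['m','i','s','t','e','r'] t) from rfl,
      pvRepl_match ['m','i','s','e','s','s'] (by decide : (['m','r','s','.'] : List Char) ≠ []) _,
      pvShiftB ['m','i','s','e','s','s'] (by decide : pvBlocked ['t','.'] ['m','r','s','.'] = true) _,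
      show (['m','i','s','e','s','s'] : List Char) ++ (['t','.'] ++ pvRepl ['m','r','s','.'] ['m','i','s','e','s','s'] (pvRepl ['m','r','.'] ['m','i','s','t','e','r'] t))
        = ['m','i','s','e','s','s','t','.'] ++ pvRepl ['m','r','s','.'] ['m','i','s','e','s','s'] (pvRepl ['m','r','.'] ['m','i','s','t','e','r'] t) from rfl,
      pvShiftB ['d','o','c','t','o','r'] (by decide : pvBlocked ['m','i','s','e','s','s','t','.'] ['d','r','.'] = true) _,
      show (['m','i','s','e','s','s','t','.'] : List Char) ++ pvRepl ['d','r','.'] ['d','o','c','t','o','r'] (pvRepl ['m','r','s','.'] ['m','i','s','e','s','s'] (pvRepl ['m','r','.'] ['m','i','s','t','e','r'] t))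
        = ['m','i','s','e','s'] ++ (['s','t','.'] ++ pvRepl ['d','r','.'] ['d','o','c','t','o','r'] (pvRepl ['m','r','s','.'] ['m','i','s','e','s','s'] (pvRepl ['m','r','.'] ['m','i','s','t','e','r'] t))) from rfl,
      pvShiftH ['m','i','s','e','s'] _ (pvStG _),
      pvRepl_match ['s','a','i','n','t'] (by decide : (['s','t','.'] : List Char) ≠ []) _,
      show (['m','i','s','e','s'] : List Char) ++ (['s','a','i','n','t'] ++ pvRepl ['s','t','.'] ['s','a','i','n','t'] (pvRepl ['d','r','.'] ['d','o','c','t','o','r'] (pvRepl ['m','r','s','.'] ['m','i','s','e','s','s'] (pvRepl ['m','r','.'] ['m','i','s','t','e','r'] t))))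
        = ['m','i','s','e','s','s','a','i','n','t'] ++ pvRepl ['s','t','.'] ['s','a','i','n','t'] (pvRepl ['d','r','.'] ['d','o','c','t','o','r'] (pvRepl ['m','r','s','.'] ['m','i','s','e','s','s'] (pvRepl ['m','r','.'] ['m','i','s','t','e','r'] t))) from rfl,
      pvShiftB ['c','o','m','p','a','n','y'] (by decide : pvBlocked ['m','i','s','e','s','s','a','i','n','t'] ['c','o','.'] = true) _,
      pvShiftB ['j','u','n','i','o','r'] (by decide : pvBlocked ['m','i','s','e','s','s','a','i','n','t'] ['j','r','.'] = true) _,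
      pvShiftB ['s','e','n','i','o','r'] (by decide : pvBlocked ['m','i','s','e','s','s','a','i','n','t'] ['s','r','.'] = true) _,
      pvShiftB ['e','t',' ','c','e','t','e','r','a'] (by decide : pvBlocked ['m','i','s','e','s','s','a','i','n','t'] ['e','t','c','.'] = true) _,
      pvShiftB ['v','e','r','s','u','s'] (by decide : pvBlocked ['m','i','s','e','s','s','a','i','n','t'] ['v','s','.'] = true) _,
      pvShiftB ['l','i','m','i','t','e','d'] (by decide : pvBlocked ['m','i','s','e','s','s','a','i','n','t'] ['l','t','d','.'] = true) _]

-- A's cascading passes on a text beginning "mrs.r." produce "misessenior" ++ …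
lemma pvDivR (t : List Char) :
    ∃ r, pvFold pvAbbrs (['m','r','s','.','r','.'] ++ t)
      = ['m','i','s','e','s','s','e','n','i','o','r'] ++ r := by
  refine ⟨pvRepl ['l','t','d','.'] ['l','i','m','i','t','e','d'] (pvRepl ['v','s','.'] ['v','e','r','s','u','s'] (pvRepl ['e','t','c','.'] ['e','t',' ','c','e','t','e','r','a'] (pvRepl ['s','r','.'] ['s','e','n','i','o','r'] (pvRepl ['j','r','.'] ['j','u','n','i','o','r'] (pvRepl ['c','o','.'] ['c','o','m','p','a','n','y'] (pvRepl ['s','t','.'] ['s','a','i','n','t'] (pvRepl ['d','r','.'] ['d','o','c','t','o','r'] (pvRepl ['m','r','s','.'] ['m','i','s','e','s','s'] (pvRepl ['m','r','.'] ['m','i','s','t','e','r'] t))))))))), ?_⟩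
  simp only [pvAbbrs, pvFold, List.foldl_cons, List.foldl_nil]
  rw [pvShiftB ['m','i','s','t','e','r'] (by decide : pvBlocked ['m','r','s','.','r','.'] ['m','r','.'] = true) t,
      show (['m','r','s','.','r','.'] : List Char) ++ pvRepl ['m','r','.'] ['m','i','s','t','e','r'] t
        = ['m','r','s','.'] ++ (['r','.'] ++ pvRepl ['m','r','.'] ['m','i','s','t','e','r'] t) from rfl,
      pvRepl_match ['m','i','s','e','s','s'] (by decide : (['m','r','s','.'] : List Char) ≠ []) _,
      pvShiftB ['m','i','s','e','s','s'] (by decide : pvBlocked ['r','.'] ['m','r','s','.'] = true) _,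
      show (['m','i','s','e','s','s'] : List Char) ++ (['r','.'] ++ pvRepl ['m','r','s','.'] ['m','i','s','e','s','s'] (pvRepl ['m','r','.'] ['m','i','s','t','e','r'] t))
        = ['m','i','s','e','s','s','r','.'] ++ pvRepl ['m','r','s','.'] ['m','i','s','e','s','s'] (pvRepl ['m','r','.'] ['m','i','s','t','e','r'] t) from rfl,
      pvShiftB ['d','o','c','t','o','r'] (by decide : pvBlocked ['m','i','s','e','s','s','r','.'] ['d','r','.'] = true) _,
      pvShiftB ['s','a','i','n','t'] (by decide : pvBlocked ['m','i','s','e','s','s','r','.'] ['s','t','.'] = true) _,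
      pvShiftB ['c','o','m','p','a','n','y'] (by decide : pvBlocked ['m','i','s','e','s','s','r','.'] ['c','o','.'] = true) _,
      pvShiftB ['j','u','n','i','o','r'] (by decide : pvBlocked ['m','i','s','e','s','s','r','.'] ['j','r','.'] = true) _,
      show (['m','i','s','e','s','s','r','.'] : List Char) ++ pvRepl ['j','r','.'] ['j','u','n','i','o','r'] (pvRepl ['c','o','.'] ['c','o','m','p','a','n','y'] (pvRepl ['s','t','.'] ['s','a','i','n','t'] (pvRepl ['d','r','.'] ['d','o','c','t','o','r'] (pvRepl ['m','r','s','.'] ['m','i','s','e','s','s'] (pvRepl ['m','r','.'] ['m','i','s','t','e','r'] t)))))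
        = ['m','i','s','e','s'] ++ (['s','r','.'] ++ pvRepl ['j','r','.'] ['j','u','n','i','o','r'] (pvRepl ['c','o','.'] ['c','o','m','p','a','n','y'] (pvRepl ['s','t','.'] ['s','a','i','n','t'] (pvRepl ['d','r','.'] ['d','o','c','t','o','r'] (pvRepl ['m','r','s','.'] ['m','i','s','e','s','s'] (pvRepl ['m','r','.'] ['m','i','s','t','e','r'] t)))))) from rfl,
      pvShiftH ['m','i','s','e','s'] _ (pvSrG _),
      pvRepl_match ['s','e','n','i','o','r'] (by decide : (['s','r','.'] : List Char) ≠ []) _,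
      show (['m','i','s','e','s'] : List Char) ++ (['s','e','n','i','o','r'] ++ pvRepl ['s','r','.'] ['s','e','n','i','o','r'] (pvRepl ['j','r','.'] ['j','u','n','i','o','r'] (pvRepl ['c','o','.'] ['c','o','m','p','a','n','y'] (pvRepl ['s','t','.'] ['s','a','i','n','t'] (pvRepl ['d','r','.'] ['d','o','c','t','o','r'] (pvRepl ['m','r','s','.'] ['m','i','s','e','s','s'] (pvRepl ['m','r','.'] ['m','i','s','t','e','r'] t)))))))
        = ['m','i','s','e','s','s','e','n','i','o','r'] ++ pvRepl ['s','r','.'] ['s','e','n','i','o','r'] (pvRepl ['j','r','.'] ['j','u','n','i','o','r'] (pvRepl ['c','o','.'] ['c','o','m','p','a','n','y'] (pvRepl ['s','t','.'] ['s','a','i','n','t'] (pvRepl ['d','r','.'] ['d','o','c','t','o','r'] (pvRepl ['m','r','s','.'] ['m','i','s','e','s','s'] (pvRepl ['m','r','.'] ['m','i','s','t','e','r'] t)))))) from rfl,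
      pvShiftB ['e','t',' ','c','e','t','e','r','a'] (by decide : pvBlocked ['m','i','s','e','s','s','e','n','i','o','r'] ['e','t','c','.'] = true) _,
      pvShiftB ['v','e','r','s','u','s'] (by decide : pvBlocked ['m','i','s','e','s','s','e','n','i','o','r'] ['v','s','.'] = true) _,
      pvShiftB ['l','i','m','i','t','e','d'] (by decide : pvBlocked ['m','i','s','e','s','s','e','n','i','o','r'] ['l','t','d','.'] = true) _]

-- the main tightness induction: inside D_ the two programs always disagree
lemma pvTightN :
    ∀ n l, l.length ≤ n →
      (['m','r','s','.','t','.'] <:+: l ∨ ['m','r','s','.','r','.'] <:+: l) →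
      pvFold pvAbbrs l ≠ pvScan l := by
  intro n
  induction n with
  | zero =>
    intro l hl hD
    have hnil : l = [] := List.eq_nil_of_length_eq_zero (Nat.le_zero.mp hl)
    subst hnil
    rcases hD with h | h <;> exact absurd (List.eq_nil_of_infix_nil h) (by decide)
  | succ n ih =>
    intro l hl hD
    by_cases h1 : (['m','r','.'] : List Char) <+: l
    · obtain ⟨t, rfl⟩ := h1
      have hlt : t.length ≤ n := by
        simp only [List.length_append, List.length_cons, List.length_nil] at hl
        omega
      have hD' : (['m','r','s','.','t','.'] <:+: t) ∨ (['m','r','s','.','r','.'] <:+: t) := by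
        rcases hD with h | h
        · exact Or.inl (pvOccDrop (by decide) (by decide) h)
        · exact Or.inr (pvOccDrop (by decide) (by decide) h)
      have habb : pvAbbrs = [] ++ (['m','r','.'], ['m','i','s','t','e','r']) :: [(['m','r','s','.'], ['m','i','s','e','s','s']), (['d','r','.'], ['d','o','c','t','o','r']), (['s','t','.'], ['s','a','i','n','t']), (['c','o','.'], ['c','o','m','p','a','n','y']), (['j','r','.'], ['j','u','n','i','o','r']), (['s','r','.'], ['s','e','n','i','o','r']), (['e','t','c','.'], ['e','t',' ','c','e','t','e','r','a']), (['v','s','.'], ['v','e','r','s','u','s']), (['l','t','d','.'], ['l','i','m','i','t','e','d'])] := by decide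
      have hA : pvFold pvAbbrs (['m','r','.'] ++ t) = ['m','i','s','t','e','r'] ++ pvFold pvAbbrs t := by
        rw [habb]
        exact pvBranch [] [(['m','r','s','.'], ['m','i','s','e','s','s']), (['d','r','.'], ['d','o','c','t','o','r']), (['s','t','.'], ['s','a','i','n','t']), (['c','o','.'], ['c','o','m','p','a','n','y']), (['j','r','.'], ['j','u','n','i','o','r']), (['s','r','.'], ['s','e','n','i','o','r']), (['e','t','c','.'], ['e','t',' ','c','e','t','e','r','a']), (['v','s','.'], ['v','e','r','s','u','s']), (['l','t','d','.'], ['l','i','m','i','t','e','d'])] ['m','r','.'] ['m','i','s','t','e','r'] t (by decide) (by decide) (by decide)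
      have hf : pvAbbrs.find? (fun p => p.1.isPrefixOf ('m'::'r'::'.'::t)) = some ((['m','r','.'], ['m','i','s','t','e','r'])) := rfl
      have hB : pvScan (['m','r','.'] ++ t) = ['m','i','s','t','e','r'] ++ pvScan t := by
        rw [show (['m','r','.'] : List Char) ++ t = 'm'::'r'::'.'::t from rfl]
        exact pvScan_cons_matched hf
      rw [hA, hB]
      intro hh
      exact (ih t hlt hD') (List.append_cancel_left hh)
    by_cases h2 : (['m','r','s','.'] : List Char) <+: l
    · obtain ⟨t, rfl⟩ := h2
      have hlt : t.length ≤ n := by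
        simp only [List.length_append, List.length_cons, List.length_nil] at hl
        omega
      by_cases hct : ['t','.'] <+: t
      · obtain ⟨x, rfl⟩ := hct
        obtain ⟨r, hr⟩ := pvDivT x
        intro hh
        rw [show (['m','r','s','.'] : List Char) ++ (['t','.'] ++ x) = ['m','r','s','.','t','.'] ++ x from rfl, hr] at hh
        have hf : pvAbbrs.find? (fun p => p.1.isPrefixOf ('m'::'r'::'s'::'.'::'t'::'.'::x)) = some ((['m','r','s','.'], ['m','i','s','e','s','s'])) := rfl
        have hf2 : pvAbbrs.find? (fun p => p.1.isPrefixOf ('t'::'.'::x)) = none := rfl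
        have hB : pvScan (['m','r','s','.','t','.'] ++ x) = ['m','i','s','e','s','s'] ++ ('t' :: pvScan ('.'::x)) := by
          rw [show (['m','r','s','.','t','.'] : List Char) ++ x = 'm'::'r'::'s'::'.'::'t'::'.'::x from rfl,
              pvScan_cons_matched hf,
              show List.drop ((['m','r','s','.'], ['m','i','s','e','s','s']) : List Char × List Char).1.length ('m'::'r'::'s'::'.'::'t'::'.'::x) = 't'::'.'::x from rfl,
              pvScan_cons_none hf2]
        rw [hB] at hh
        have e1 : (['m','i','s','e','s','s','a','i','n','t'] ++ r)[6]? = ((['m','i','s','e','s','s'] : List Char) ++ ('t' :: pvScan ('.'::x)))[6]? := congrArg (fun z : List Char => z[6]?) hh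
        rw [List.getElem?_append_left (by decide : (6:Nat) < (['m','i','s','e','s','s','a','i','n','t'] : List Char).length),
            List.getElem?_append_right (by decide : (['m','i','s','e','s','s'] : List Char).length ≤ 6)] at e1
        simp at e1
      · by_cases hcr : ['r','.'] <+: t
        · obtain ⟨x, rfl⟩ := hcr
          obtain ⟨r, hr⟩ := pvDivR x
          intro hh
          rw [show (['m','r','s','.'] : List Char) ++ (['r','.'] ++ x) = ['m','r','s','.','r','.'] ++ x from rfl, hr] at hh
          have hf : pvAbbrs.find? (fun p => p.1.isPrefixOf ('m'::'r'::'s'::'.'::'r'::'.'::x)) = some ((['m','r','s','.'], ['m','i','s','e','s','s'])) := rfl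
          have hf2 : pvAbbrs.find? (fun p => p.1.isPrefixOf ('r'::'.'::x)) = none := rfl
          have hB : pvScan (['m','r','s','.','r','.'] ++ x) = ['m','i','s','e','s','s'] ++ ('r' :: pvScan ('.'::x)) := by
            rw [show (['m','r','s','.','r','.'] : List Char) ++ x = 'm'::'r'::'s'::'.'::'r'::'.'::x from rfl,
                pvScan_cons_matched hf,
                show List.drop ((['m','r','s','.'], ['m','i','s','e','s','s']) : List Char × List Char).1.length ('m'::'r'::'s'::'.'::'r'::'.'::x) = 'r'::'.'::x from rfl,
                pvScan_cons_none hf2]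
          rw [hB] at hh
          have e1 : (['m','i','s','e','s','s','e','n','i','o','r'] ++ r)[6]? = ((['m','i','s','e','s','s'] : List Char) ++ ('r' :: pvScan ('.'::x)))[6]? := congrArg (fun z : List Char => z[6]?) hh
          rw [List.getElem?_append_left (by decide : (6:Nat) < (['m','i','s','e','s','s','e','n','i','o','r'] : List Char).length),
              List.getElem?_append_right (by decide : (['m','i','s','e','s','s'] : List Char).length ≤ 6)] at e1
          simp at e1
        · have hD' : (['m','r','s','.','t','.'] <:+: t) ∨ (['m','r','s','.','r','.'] <:+: t) := by
            rcases hD with h | h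
            · exact Or.inl (pvOccDropMrsT hct h)
            · exact Or.inr (pvOccDropMrsR hcr h)
          have hA : pvFold pvAbbrs (['m','r','s','.'] ++ t) = ['m','i','s','e','s','s'] ++ pvFold pvAbbrs t := pvBranch2 t hct hcr
          have hf : pvAbbrs.find? (fun p => p.1.isPrefixOf ('m'::'r'::'s'::'.'::t)) = some ((['m','r','s','.'], ['m','i','s','e','s','s'])) := rfl
          have hB : pvScan (['m','r','s','.'] ++ t) = ['m','i','s','e','s','s'] ++ pvScan t := by
            rw [show (['m','r','s','.'] : List Char) ++ t = 'm'::'r'::'s'::'.'::t from rfl]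
            exact pvScan_cons_matched hf
          rw [hA, hB]
          intro hh
          exact (ih t hlt hD') (List.append_cancel_left hh)
    by_cases h3 : (['d','r','.'] : List Char) <+: l
    · obtain ⟨t, rfl⟩ := h3
      have hlt : t.length ≤ n := by
        simp only [List.length_append, List.length_cons, List.length_nil] at hl
        omega
      have hD' : (['m','r','s','.','t','.'] <:+: t) ∨ (['m','r','s','.','r','.'] <:+: t) := by
        rcases hD with h | h
        · exact Or.inl (pvOccDrop (by decide) (by decide) h)
        · exact Or.inr (pvOccDrop (by decide) (by decide) h)
      have habb : pvAbbrs = [(['m','r','.'], ['m','i','s','t','e','r']), (['m','r','s','.'], ['m','i','s','e','s','s'])] ++ (['d','r','.'], ['d','o','c','t','o','r']) :: [(['s','t','.'], ['s','a','i','n','t']), (['c','o','.'], ['c','o','m','p','a','n','y']), (['j','r','.'], ['j','u','n','i','o','r']), (['s','r','.'], ['s','e','n','i','o','r']), (['e','t','c','.'], ['e','t',' ','c','e','t','e','r','a']), (['v','s','.'], ['v','e','r','s','u','s']), (['l','t','d','.'], ['l','i','m','i','t','e','d'])] := by decide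
      have hA : pvFold pvAbbrs (['d','r','.'] ++ t) = ['d','o','c','t','o','r'] ++ pvFold pvAbbrs t := by
        rw [habb]
        exact pvBranch [(['m','r','.'], ['m','i','s','t','e','r']), (['m','r','s','.'], ['m','i','s','e','s','s'])] [(['s','t','.'], ['s','a','i','n','t']), (['c','o','.'], ['c','o','m','p','a','n','y']), (['j','r','.'], ['j','u','n','i','o','r']), (['s','r','.'], ['s','e','n','i','o','r']), (['e','t','c','.'], ['e','t',' ','c','e','t','e','r','a']), (['v','s','.'], ['v','e','r','s','u','s']), (['l','t','d','.'], ['l','i','m','i','t','e','d'])] ['d','r','.'] ['d','o','c','t','o','r'] t (by decide) (by decide) (by decide)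
      have hf : pvAbbrs.find? (fun p => p.1.isPrefixOf ('d'::'r'::'.'::t)) = some ((['d','r','.'], ['d','o','c','t','o','r'])) := rfl
      have hB : pvScan (['d','r','.'] ++ t) = ['d','o','c','t','o','r'] ++ pvScan t := by
        rw [show (['d','r','.'] : List Char) ++ t = 'd'::'r'::'.'::t from rfl]
        exact pvScan_cons_matched hf
      rw [hA, hB]
      intro hh
      exact (ih t hlt hD') (List.append_cancel_left hh)
    by_cases h4 : (['s','t','.'] : List Char) <+: l
    · obtain ⟨t, rfl⟩ := h4
      have hlt : t.length ≤ n := by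
        simp only [List.length_append, List.length_cons, List.length_nil] at hl
        omega
      have hD' : (['m','r','s','.','t','.'] <:+: t) ∨ (['m','r','s','.','r','.'] <:+: t) := by
        rcases hD with h | h
        · exact Or.inl (pvOccDrop (by decide) (by decide) h)
        · exact Or.inr (pvOccDrop (by decide) (by decide) h)
      have habb : pvAbbrs = [(['m','r','.'], ['m','i','s','t','e','r']), (['m','r','s','.'], ['m','i','s','e','s','s']), (['d','r','.'], ['d','o','c','t','o','r'])] ++ (['s','t','.'], ['s','a','i','n','t']) :: [(['c','o','.'], ['c','o','m','p','a','n','y']), (['j','r','.'], ['j','u','n','i','o','r']), (['s','r','.'], ['s','e','n','i','o','r']), (['e','t','c','.'], ['e','t',' ','c','e','t','e','r','a']), (['v','s','.'], ['v','e','r','s','u','s']), (['l','t','d','.'], ['l','i','m','i','t','e','d'])] := by decide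
      have hA : pvFold pvAbbrs (['s','t','.'] ++ t) = ['s','a','i','n','t'] ++ pvFold pvAbbrs t := by
        rw [habb]
        exact pvBranch [(['m','r','.'], ['m','i','s','t','e','r']), (['m','r','s','.'], ['m','i','s','e','s','s']), (['d','r','.'], ['d','o','c','t','o','r'])] [(['c','o','.'], ['c','o','m','p','a','n','y']), (['j','r','.'], ['j','u','n','i','o','r']), (['s','r','.'], ['s','e','n','i','o','r']), (['e','t','c','.'], ['e','t',' ','c','e','t','e','r','a']), (['v','s','.'], ['v','e','r','s','u','s']), (['l','t','d','.'], ['l','i','m','i','t','e','d'])] ['s','t','.'] ['s','a','i','n','t'] t (by decide) (by decide) (by decide)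
      have hf : pvAbbrs.find? (fun p => p.1.isPrefixOf ('s'::'t'::'.'::t)) = some ((['s','t','.'], ['s','a','i','n','t'])) := rfl
      have hB : pvScan (['s','t','.'] ++ t) = ['s','a','i','n','t'] ++ pvScan t := by
        rw [show (['s','t','.'] : List Char) ++ t = 's'::'t'::'.'::t from rfl]
        exact pvScan_cons_matched hf
      rw [hA, hB]
      intro hh
      exact (ih t hlt hD') (List.append_cancel_left hh)
    by_cases h5 : (['c','o','.'] : List Char) <+: l
    · obtain ⟨t, rfl⟩ := h5
      have hlt : t.length ≤ n := by
        simp only [List.length_append, List.length_cons, List.length_nil] at hl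
        omega
      have hD' : (['m','r','s','.','t','.'] <:+: t) ∨ (['m','r','s','.','r','.'] <:+: t) := by
        rcases hD with h | h
        · exact Or.inl (pvOccDrop (by decide) (by decide) h)
        · exact Or.inr (pvOccDrop (by decide) (by decide) h)
      have habb : pvAbbrs = [(['m','r','.'], ['m','i','s','t','e','r']), (['m','r','s','.'], ['m','i','s','e','s','s']), (['d','r','.'], ['d','o','c','t','o','r']), (['s','t','.'], ['s','a','i','n','t'])] ++ (['c','o','.'], ['c','o','m','p','a','n','y']) :: [(['j','r','.'], ['j','u','n','i','o','r']), (['s','r','.'], ['s','e','n','i','o','r']), (['e','t','c','.'], ['e','t',' ','c','e','t','e','r','a']), (['v','s','.'], ['v','e','r','s','u','s']), (['l','t','d','.'], ['l','i','m','i','t','e','d'])] := by decide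
      have hA : pvFold pvAbbrs (['c','o','.'] ++ t) = ['c','o','m','p','a','n','y'] ++ pvFold pvAbbrs t := by
        rw [habb]
        exact pvBranch [(['m','r','.'], ['m','i','s','t','e','r']), (['m','r','s','.'], ['m','i','s','e','s','s']), (['d','r','.'], ['d','o','c','t','o','r']), (['s','t','.'], ['s','a','i','n','t'])] [(['j','r','.'], ['j','u','n','i','o','r']), (['s','r','.'], ['s','e','n','i','o','r']), (['e','t','c','.'], ['e','t',' ','c','e','t','e','r','a']), (['v','s','.'], ['v','e','r','s','u','s']), (['l','t','d','.'], ['l','i','m','i','t','e','d'])] ['c','o','.'] ['c','o','m','p','a','n','y'] t (by decide) (by decide) (by decide)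
      have hf : pvAbbrs.find? (fun p => p.1.isPrefixOf ('c'::'o'::'.'::t)) = some ((['c','o','.'], ['c','o','m','p','a','n','y'])) := rfl
      have hB : pvScan (['c','o','.'] ++ t) = ['c','o','m','p','a','n','y'] ++ pvScan t := by
        rw [show (['c','o','.'] : List Char) ++ t = 'c'::'o'::'.'::t from rfl]
        exact pvScan_cons_matched hf
      rw [hA, hB]
      intro hh
      exact (ih t hlt hD') (List.append_cancel_left hh)
    by_cases h6 : (['j','r','.'] : List Char) <+: l
    · obtain ⟨t, rfl⟩ := h6
      have hlt : t.length ≤ n := by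
        simp only [List.length_append, List.length_cons, List.length_nil] at hl
        omega
      have hD' : (['m','r','s','.','t','.'] <:+: t) ∨ (['m','r','s','.','r','.'] <:+: t) := by
        rcases hD with h | h
        · exact Or.inl (pvOccDrop (by decide) (by decide) h)
        · exact Or.inr (pvOccDrop (by decide) (by decide) h)
      have habb : pvAbbrs = [(['m','r','.'], ['m','i','s','t','e','r']), (['m','r','s','.'], ['m','i','s','e','s','s']), (['d','r','.'], ['d','o','c','t','o','r']), (['s','t','.'], ['s','a','i','n','t']), (['c','o','.'], ['c','o','m','p','a','n','y'])] ++ (['j','r','.'], ['j','u','n','i','o','r']) :: [(['s','r','.'], ['s','e','n','i','o','r']), (['e','t','c','.'], ['e','t',' ','c','e','t','e','r','a']), (['v','s','.'], ['v','e','r','s','u','s']), (['l','t','d','.'], ['l','i','m','i','t','e','d'])] := by decide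
      have hA : pvFold pvAbbrs (['j','r','.'] ++ t) = ['j','u','n','i','o','r'] ++ pvFold pvAbbrs t := by
        rw [habb]
        exact pvBranch [(['m','r','.'], ['m','i','s','t','e','r']), (['m','r','s','.'], ['m','i','s','e','s','s']), (['d','r','.'], ['d','o','c','t','o','r']), (['s','t','.'], ['s','a','i','n','t']), (['c','o','.'], ['c','o','m','p','a','n','y'])] [(['s','r','.'], ['s','e','n','i','o','r']), (['e','t','c','.'], ['e','t',' ','c','e','t','e','r','a']), (['v','s','.'], ['v','e','r','s','u','s']), (['l','t','d','.'], ['l','i','m','i','t','e','d'])] ['j','r','.'] ['j','u','n','i','o','r'] t (by decide) (by decide) (by decide)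
      have hf : pvAbbrs.find? (fun p => p.1.isPrefixOf ('j'::'r'::'.'::t)) = some ((['j','r','.'], ['j','u','n','i','o','r'])) := rfl
      have hB : pvScan (['j','r','.'] ++ t) = ['j','u','n','i','o','r'] ++ pvScan t := by
        rw [show (['j','r','.'] : List Char) ++ t = 'j'::'r'::'.'::t from rfl]
        exact pvScan_cons_matched hf
      rw [hA, hB]
      intro hh
      exact (ih t hlt hD') (List.append_cancel_left hh)
    by_cases h7 : (['s','r','.'] : List Char) <+: l
    · obtain ⟨t, rfl⟩ := h7
      have hlt : t.length ≤ n := by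
        simp only [List.length_append, List.length_cons, List.length_nil] at hl
        omega
      have hD' : (['m','r','s','.','t','.'] <:+: t) ∨ (['m','r','s','.','r','.'] <:+: t) := by
        rcases hD with h | h
        · exact Or.inl (pvOccDrop (by decide) (by decide) h)
        · exact Or.inr (pvOccDrop (by decide) (by decide) h)
      have habb : pvAbbrs = [(['m','r','.'], ['m','i','s','t','e','r']), (['m','r','s','.'], ['m','i','s','e','s','s']), (['d','r','.'], ['d','o','c','t','o','r']), (['s','t','.'], ['s','a','i','n','t']), (['c','o','.'], ['c','o','m','p','a','n','y']), (['j','r','.'], ['j','u','n','i','o','r'])] ++ (['s','r','.'], ['s','e','n','i','o','r']) :: [(['e','t','c','.'], ['e','t',' ','c','e','t','e','r','a']), (['v','s','.'], ['v','e','r','s','u','s']), (['l','t','d','.'], ['l','i','m','i','t','e','d'])] := by decide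
      have hA : pvFold pvAbbrs (['s','r','.'] ++ t) = ['s','e','n','i','o','r'] ++ pvFold pvAbbrs t := by
        rw [habb]
        exact pvBranch [(['m','r','.'], ['m','i','s','t','e','r']), (['m','r','s','.'], ['m','i','s','e','s','s']), (['d','r','.'], ['d','o','c','t','o','r']), (['s','t','.'], ['s','a','i','n','t']), (['c','o','.'], ['c','o','m','p','a','n','y']), (['j','r','.'], ['j','u','n','i','o','r'])] [(['e','t','c','.'], ['e','t',' ','c','e','t','e','r','a']), (['v','s','.'], ['v','e','r','s','u','s']), (['l','t','d','.'], ['l','i','m','i','t','e','d'])] ['s','r','.'] ['s','e','n','i','o','r'] t (by decide) (by decide) (by decide)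
      have hf : pvAbbrs.find? (fun p => p.1.isPrefixOf ('s'::'r'::'.'::t)) = some ((['s','r','.'], ['s','e','n','i','o','r'])) := rfl
      have hB : pvScan (['s','r','.'] ++ t) = ['s','e','n','i','o','r'] ++ pvScan t := by
        rw [show (['s','r','.'] : List Char) ++ t = 's'::'r'::'.'::t from rfl]
        exact pvScan_cons_matched hf
      rw [hA, hB]
      intro hh
      exact (ih t hlt hD') (List.append_cancel_left hh)
    by_cases h8 : (['e','t','c','.'] : List Char) <+: l
    · obtain ⟨t, rfl⟩ := h8
      have hlt : t.length ≤ n := by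
        simp only [List.length_append, List.length_cons, List.length_nil] at hl
        omega
      have hD' : (['m','r','s','.','t','.'] <:+: t) ∨ (['m','r','s','.','r','.'] <:+: t) := by
        rcases hD with h | h
        · exact Or.inl (pvOccDrop (by decide) (by decide) h)
        · exact Or.inr (pvOccDrop (by decide) (by decide) h)
      have habb : pvAbbrs = [(['m','r','.'], ['m','i','s','t','e','r']), (['m','r','s','.'], ['m','i','s','e','s','s']), (['d','r','.'], ['d','o','c','t','o','r']), (['s','t','.'], ['s','a','i','n','t']), (['c','o','.'], ['c','o','m','p','a','n','y']), (['j','r','.'], ['j','u','n','i','o','r']), (['s','r','.'], ['s','e','n','i','o','r'])] ++ (['e','t','c','.'], ['e','t',' ','c','e','t','e','r','a']) :: [(['v','s','.'], ['v','e','r','s','u','s']), (['l','t','d','.'], ['l','i','m','i','t','e','d'])] := by decide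
      have hA : pvFold pvAbbrs (['e','t','c','.'] ++ t) = ['e','t',' ','c','e','t','e','r','a'] ++ pvFold pvAbbrs t := by
        rw [habb]
        exact pvBranch [(['m','r','.'], ['m','i','s','t','e','r']), (['m','r','s','.'], ['m','i','s','e','s','s']), (['d','r','.'], ['d','o','c','t','o','r']), (['s','t','.'], ['s','a','i','n','t']), (['c','o','.'], ['c','o','m','p','a','n','y']), (['j','r','.'], ['j','u','n','i','o','r']), (['s','r','.'], ['s','e','n','i','o','r'])] [(['v','s','.'], ['v','e','r','s','u','s']), (['l','t','d','.'], ['l','i','m','i','t','e','d'])] ['e','t','c','.'] ['e','t',' ','c','e','t','e','r','a'] t (by decide) (by decide) (by decide)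
      have hf : pvAbbrs.find? (fun p => p.1.isPrefixOf ('e'::'t'::'c'::'.'::t)) = some ((['e','t','c','.'], ['e','t',' ','c','e','t','e','r','a'])) := rfl
      have hB : pvScan (['e','t','c','.'] ++ t) = ['e','t',' ','c','e','t','e','r','a'] ++ pvScan t := by
        rw [show (['e','t','c','.'] : List Char) ++ t = 'e'::'t'::'c'::'.'::t from rfl]
        exact pvScan_cons_matched hf
      rw [hA, hB]
      intro hh
      exact (ih t hlt hD') (List.append_cancel_left hh)
    by_cases h9 : (['v','s','.'] : List Char) <+: l
    · obtain ⟨t, rfl⟩ := h9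
      have hlt : t.length ≤ n := by
        simp only [List.length_append, List.length_cons, List.length_nil] at hl
        omega
      have hD' : (['m','r','s','.','t','.'] <:+: t) ∨ (['m','r','s','.','r','.'] <:+: t) := by
        rcases hD with h | h
        · exact Or.inl (pvOccDrop (by decide) (by decide) h)
        · exact Or.inr (pvOccDrop (by decide) (by decide) h)
      have habb : pvAbbrs = [(['m','r','.'], ['m','i','s','t','e','r']), (['m','r','s','.'], ['m','i','s','e','s','s']), (['d','r','.'], ['d','o','c','t','o','r']), (['s','t','.'], ['s','a','i','n','t']), (['c','o','.'], ['c','o','m','p','a','n','y']), (['j','r','.'], ['j','u','n','i','o','r']), (['s','r','.'], ['s','e','n','i','o','r']), (['e','t','c','.'], ['e','t',' ','c','e','t','e','r','a'])] ++ (['v','s','.'], ['v','e','r','s','u','s']) :: [(['l','t','d','.'], ['l','i','m','i','t','e','d'])] := by decide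
      have hA : pvFold pvAbbrs (['v','s','.'] ++ t) = ['v','e','r','s','u','s'] ++ pvFold pvAbbrs t := by
        rw [habb]
        exact pvBranch [(['m','r','.'], ['m','i','s','t','e','r']), (['m','r','s','.'], ['m','i','s','e','s','s']), (['d','r','.'], ['d','o','c','t','o','r']), (['s','t','.'], ['s','a','i','n','t']), (['c','o','.'], ['c','o','m','p','a','n','y']), (['j','r','.'], ['j','u','n','i','o','r']), (['s','r','.'], ['s','e','n','i','o','r']), (['e','t','c','.'], ['e','t',' ','c','e','t','e','r','a'])] [(['l','t','d','.'], ['l','i','m','i','t','e','d'])] ['v','s','.'] ['v','e','r','s','u','s'] t (by decide) (by decide) (by decide)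
      have hf : pvAbbrs.find? (fun p => p.1.isPrefixOf ('v'::'s'::'.'::t)) = some ((['v','s','.'], ['v','e','r','s','u','s'])) := rfl
      have hB : pvScan (['v','s','.'] ++ t) = ['v','e','r','s','u','s'] ++ pvScan t := by
        rw [show (['v','s','.'] : List Char) ++ t = 'v'::'s'::'.'::t from rfl]
        exact pvScan_cons_matched hf
      rw [hA, hB]
      intro hh
      exact (ih t hlt hD') (List.append_cancel_left hh)
    by_cases h10 : (['l','t','d','.'] : List Char) <+: l
    · obtain ⟨t, rfl⟩ := h10
      have hlt : t.length ≤ n := by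
        simp only [List.length_append, List.length_cons, List.length_nil] at hl
        omega
      have hD' : (['m','r','s','.','t','.'] <:+: t) ∨ (['m','r','s','.','r','.'] <:+: t) := by
        rcases hD with h | h
        · exact Or.inl (pvOccDrop (by decide) (by decide) h)
        · exact Or.inr (pvOccDrop (by decide) (by decide) h)
      have habb : pvAbbrs = [(['m','r','.'], ['m','i','s','t','e','r']), (['m','r','s','.'], ['m','i','s','e','s','s']), (['d','r','.'], ['d','o','c','t','o','r']), (['s','t','.'], ['s','a','i','n','t']), (['c','o','.'], ['c','o','m','p','a','n','y']), (['j','r','.'], ['j','u','n','i','o','r']), (['s','r','.'], ['s','e','n','i','o','r']), (['e','t','c','.'], ['e','t',' ','c','e','t','e','r','a']), (['v','s','.'], ['v','e','r','s','u','s'])] ++ (['l','t','d','.'], ['l','i','m','i','t','e','d']) :: [] := by decide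
      have hA : pvFold pvAbbrs (['l','t','d','.'] ++ t) = ['l','i','m','i','t','e','d'] ++ pvFold pvAbbrs t := by
        rw [habb]
        exact pvBranch [(['m','r','.'], ['m','i','s','t','e','r']), (['m','r','s','.'], ['m','i','s','e','s','s']), (['d','r','.'], ['d','o','c','t','o','r']), (['s','t','.'], ['s','a','i','n','t']), (['c','o','.'], ['c','o','m','p','a','n','y']), (['j','r','.'], ['j','u','n','i','o','r']), (['s','r','.'], ['s','e','n','i','o','r']), (['e','t','c','.'], ['e','t',' ','c','e','t','e','r','a']), (['v','s','.'], ['v','e','r','s','u','s'])] [] ['l','t','d','.'] ['l','i','m','i','t','e','d'] t (by decide) (by decide) (by decide)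
      have hf : pvAbbrs.find? (fun p => p.1.isPrefixOf ('l'::'t'::'d'::'.'::t)) = some ((['l','t','d','.'], ['l','i','m','i','t','e','d'])) := rfl
      have hB : pvScan (['l','t','d','.'] ++ t) = ['l','i','m','i','t','e','d'] ++ pvScan t := by
        rw [show (['l','t','d','.'] : List Char) ++ t = 'l'::'t'::'d'::'.'::t from rfl]
        exact pvScan_cons_matched hf
      rw [hA, hB]
      intro hh
      exact (ih t hlt hD') (List.append_cancel_left hh)
    cases l with
    | nil =>
      rcases hD with h | h <;> exact absurd (List.eq_nil_of_infix_nil h) (by decide)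
    | cons c t =>
      have hlt : t.length ≤ n := by
        simp only [List.length_cons] at hl
        omega
      have hD' : (['m','r','s','.','t','.'] <:+: t) ∨ (['m','r','s','.','r','.'] <:+: t) := by
        rcases hD with h | h
        · refine Or.inl ((List.infix_cons_iff.mp h).resolve_left ?_)
          intro hp
          exact h2 (List.IsPrefix.trans (by decide) hp)
        · refine Or.inr ((List.infix_cons_iff.mp h).resolve_left ?_)
          intro hp
          exact h2 (List.IsPrefix.trans (by decide) hp)
      have hA : pvFold pvAbbrs (c :: t) = c :: pvFold pvAbbrs t := by
        apply pvPeel pvAbbrs c t (by decide) (by decide)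
        intro pr hm
        fin_cases hm
        exacts [h1, h2, h3, h4, h5, h6, h7, h8, h9, h10]
      have hn0 : ((fun p : List Char × List Char => p.1.isPrefixOf (c :: t)) ((['m','r','.'], ['m','i','s','t','e','r']))) ≠ true :=
        fun hx => h1 (List.isPrefixOf_iff_prefix.mp hx)
      have hn1 : ((fun p : List Char × List Char => p.1.isPrefixOf (c :: t)) ((['m','r','s','.'], ['m','i','s','e','s','s']))) ≠ true :=
        fun hx => h2 (List.isPrefixOf_iff_prefix.mp hx)
      have hn2 : ((fun p : List Char × List Char => p.1.isPrefixOf (c :: t)) ((['d','r','.'], ['d','o','c','t','o','r']))) ≠ true :=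
        fun hx => h3 (List.isPrefixOf_iff_prefix.mp hx)
      have hn3 : ((fun p : List Char × List Char => p.1.isPrefixOf (c :: t)) ((['s','t','.'], ['s','a','i','n','t']))) ≠ true :=
        fun hx => h4 (List.isPrefixOf_iff_prefix.mp hx)
      have hn4 : ((fun p : List Char × List Char => p.1.isPrefixOf (c :: t)) ((['c','o','.'], ['c','o','m','p','a','n','y']))) ≠ true :=
        fun hx => h5 (List.isPrefixOf_iff_prefix.mp hx)
      have hn5 : ((fun p : List Char × List Char => p.1.isPrefixOf (c :: t)) ((['j','r','.'], ['j','u','n','i','o','r']))) ≠ true :=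
        fun hx => h6 (List.isPrefixOf_iff_prefix.mp hx)
      have hn6 : ((fun p : List Char × List Char => p.1.isPrefixOf (c :: t)) ((['s','r','.'], ['s','e','n','i','o','r']))) ≠ true :=
        fun hx => h7 (List.isPrefixOf_iff_prefix.mp hx)
      have hn7 : ((fun p : List Char × List Char => p.1.isPrefixOf (c :: t)) ((['e','t','c','.'], ['e','t',' ','c','e','t','e','r','a']))) ≠ true :=
        fun hx => h8 (List.isPrefixOf_iff_prefix.mp hx)
      have hn8 : ((fun p : List Char × List Char => p.1.isPrefixOf (c :: t)) ((['v','s','.'], ['v','e','r','s','u','s']))) ≠ true :=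
        fun hx => h9 (List.isPrefixOf_iff_prefix.mp hx)
      have hn9 : ((fun p : List Char × List Char => p.1.isPrefixOf (c :: t)) ((['l','t','d','.'], ['l','i','m','i','t','e','d']))) ≠ true :=
        fun hx => h10 (List.isPrefixOf_iff_prefix.mp hx)
      have hf : pvAbbrs.find? (fun p => p.1.isPrefixOf (c :: t)) = none := by
        rw [show pvAbbrs = [(['m','r','.'], ['m','i','s','t','e','r']), (['m','r','s','.'], ['m','i','s','e','s','s']), (['d','r','.'], ['d','o','c','t','o','r']), (['s','t','.'], ['s','a','i','n','t']), (['c','o','.'], ['c','o','m','p','a','n','y']), (['j','r','.'], ['j','u','n','i','o','r']), (['s','r','.'], ['s','e','n','i','o','r']), (['e','t','c','.'], ['e','t',' ','c','e','t','e','r','a']), (['v','s','.'], ['v','e','r','s','u','s']), (['l','t','d','.'], ['l','i','m','i','t','e','d'])] from rfl]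
        rw [List.find?_cons_of_neg (p := fun p : List Char × List Char => p.1.isPrefixOf (c :: t)) hn0,
            List.find?_cons_of_neg (p := fun p : List Char × List Char => p.1.isPrefixOf (c :: t)) hn1,
            List.find?_cons_of_neg (p := fun p : List Char × List Char => p.1.isPrefixOf (c :: t)) hn2,
            List.find?_cons_of_neg (p := fun p : List Char × List Char => p.1.isPrefixOf (c :: t)) hn3,
            List.find?_cons_of_neg (p := fun p : List Char × List Char => p.1.isPrefixOf (c :: t)) hn4,
            List.find?_cons_of_neg (p := fun p : List Char × List Char => p.1.isPrefixOf (c :: t)) hn5,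
            List.find?_cons_of_neg (p := fun p : List Char × List Char => p.1.isPrefixOf (c :: t)) hn6,
            List.find?_cons_of_neg (p := fun p : List Char × List Char => p.1.isPrefixOf (c :: t)) hn7,
            List.find?_cons_of_neg (p := fun p : List Char × List Char => p.1.isPrefixOf (c :: t)) hn8,
            List.find?_cons_of_neg (p := fun p : List Char × List Char => p.1.isPrefixOf (c :: t)) hn9,
            List.find?_nil]
      rw [hA, pvScan_cons_none hf]
      intro hh
      injection hh with hh1 hh2
      exact (ih t hlt hD') hh2


lemma pvA_toList (text : String) :
    (expand_abbreviations text).toList = pvFold pvAbbrs text.toList := by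
  show (List.foldl (fun t p => PySem.Str.replace t p.1 p.2) text
      [("mr.", "mister"), ("mrs.", "misess"), ("dr.", "doctor"), ("st.", "saint"), ("co.", "company"), ("jr.", "junior"), ("sr.", "senior"), ("etc.", "et cetera"), ("vs.", "versus"), ("ltd.", "limited")]).toList = _
  simp only [List.foldl_cons, List.foldl_nil, PySem.Str.toList_replace]
  rw [pvReplace_eq "mister".toList (by decide : ("mr." : String).toList ≠ []),
      pvReplace_eq "misess".toList (by decide : ("mrs." : String).toList ≠ []),
      pvReplace_eq "doctor".toList (by decide : ("dr." : String).toList ≠ []),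
      pvReplace_eq "saint".toList (by decide : ("st." : String).toList ≠ []),
      pvReplace_eq "company".toList (by decide : ("co." : String).toList ≠ []),
      pvReplace_eq "junior".toList (by decide : ("jr." : String).toList ≠ []),
      pvReplace_eq "senior".toList (by decide : ("sr." : String).toList ≠ []),
      pvReplace_eq "et cetera".toList (by decide : ("etc." : String).toList ≠ []),
      pvReplace_eq "versus".toList (by decide : ("vs." : String).toList ≠ []),
      pvReplace_eq "limited".toList (by decide : ("ltd." : String).toList ≠ [])]
  simp only [show ("mr." : String).toList = ['m','r','.'] from by decide, show ("mister" : String).toList = ['m','i','s','t','e','r'] from by decide, show ("mrs." : String).toList = ['m','r','s','.'] from by decide, show ("misess" : String).toList = ['m','i','s','e','s','s'] from by decide, show ("dr." : String).toList = ['d','r','.'] from by decide, show ("doctor" : String).toList = ['d','o','c','t','o','r'] from by decide, show ("st." : String).toList = ['s','t','.'] from by decide, show ("saint" : String).toList = ['s','a','i','n','t'] from by decide, show ("co." : String).toList = ['c','o','.'] from by decide, show ("company" : String).toList = ['c','o','m','p','a','n','y'] from by decide, show ("jr." : String).toList = ['j','r','.'] from by decide, show ("junior" : String).toList = ['j','u','n','i','o','r']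 from by decide, show ("sr." : String).toList = ['s','r','.'] from by decide, show ("senior" : String).toList = ['s','e','n','i','o','r'] from by decide, show ("etc." : String).toList = ['e','t','c','.'] from by decide, show ("et cetera" : String).toList = ['e','t',' ','c','e','t','e','r','a'] from by decide, show ("vs." : String).toList = ['v','s','.'] from by decide, show ("versus" : String).toList = ['v','e','r','s','u','s'] from by decide, show ("ltd." : String).toList = ['l','t','d','.'] from by decide, show ("limited" : String).toList = ['l','i','m','i','t','e','d'] from by decide]
  rfl

lemma pvHasPat_iff (u l : List Char) (hu : u ≠ []) : pvHasPat u l = true ↔ u <:+: l := by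
  induction l with
  | nil =>
    simp only [pvHasPat]
    constructor
    · intro hc; exact absurd hc (by simp)
    · intro hc; exact absurd (List.eq_nil_of_infix_nil hc) hu
  | cons c t ih =>
    simp only [pvHasPat, Bool.or_eq_true, decide_eq_true_eq, ih, List.infix_cons_iff]
    constructor
    · rintro (h | h)
      · exact Or.inl (h ▸ List.take_prefix _ _)
      · exact Or.inr h
    · rintro (h | h)
      · exact Or.inl (List.prefix_iff_eq_take.mp h).symm
      · exact Or.inr h

lemma pvB_toList (text : String) :
    (expand_abbreviations_alt text).toList = pvScan text.toList := String.toList_ofList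

-- ===== VERDICT (by name: the statement is the Claim_ definition above) =====
theorem expand_abbreviations_spec : Claim_unchanged_expand_abbreviations := by
  intro text _
  unfold Spec_expand_abbreviations
  intro hD
  unfold D_expand_abbreviations at hD
  rw [Bool.or_eq_true, not_or, pvHasPat_iff _ _ (by decide), pvHasPat_iff _ _ (by decide)] at hD
  obtain ⟨hd1, hd2⟩ := hD
  rw [show ("mrs.t." : String).toList = ['m','r','s','.','t','.'] from by decide] at hd1
  rw [show ("mrs.r." : String).toList = ['m','r','s','.','r','.'] from by decide] at hd2
  rw [← String.toList_inj, pvA_toList, pvB_toList]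
  exact pvMainN text.toList.length text.toList le_rfl hd1 hd2

theorem expand_abbreviations_changed : Claim_changed_expand_abbreviations := by
  unfold Claim_changed_expand_abbreviations
  refine ⟨by decide, by decide, ?_, ?_, ?_⟩
  · rw [← String.toList_inj]
    show (expand_abbreviations "mrs.t.").toList = ("misessaint" : String).toList
    show (List.foldl (fun t p => PySem.Str.replace t p.1 p.2) "mrs.t."
        [("mr.", "mister"), ("mrs.", "misess"), ("dr.", "doctor"), ("st.", "saint"), ("co.", "company"), ("jr.", "junior"), ("sr.", "senior"), ("etc.", "et cetera"), ("vs.", "versus"), ("ltd.", "limited")]).toList = ("misessaint" : String).toList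
    simp only [List.foldl_cons, List.foldl_nil, PySem.Str.toList_replace]
    decide
  · rw [← String.toList_inj]
    show (expand_abbreviations_alt "mrs.t.").toList = ("misesst." : String).toList
    rw [pvB_toList]
    decide
  · intro h
    exact (by decide : ¬ (("misessaint" : String).toList = ("misesst." : String).toList))
      (congrArg String.toList h)

theorem expand_abbreviations_tight : Claim_exact_expand_abbreviations := by
  intro text _ hD
  unfold D_expand_abbreviations at hD
  rw [Bool.or_eq_true] at hD
  have hD' : (['m','r','s','.','t','.'] <:+: text.toList) ∨ (['m','r','s','.','r','.'] <:+: text.toList) := by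
    rcases hD with h | h
    · refine Or.inl ?_
      have h2 := (pvHasPat_iff _ _ (by decide)).mp h
      rwa [show ("mrs.t." : String).toList = ['m','r','s','.','t','.'] from by decide] at h2
    · refine Or.inr ?_
      have h2 := (pvHasPat_iff _ _ (by decide)).mp h
      rwa [show ("mrs.r." : String).toList = ['m','r','s','.','r','.'] from by decide] at h2
  intro hh
  exact pvTightN text.toList.length text.toList le_rfl hD'
    (by rw [← pvA_toList, ← pvB_toList, hh])
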